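-- pv_equiv track=rewrite | github.com/liupengsay/PyIsTheBestLang | src/dp/tree_dp/template.py | get_tree_distance_max_weighted
-- ===== SOURCE A (Python) =====
-- def get_tree_distance_max_weighted(dct, weights):
--     # Calculate the maximum distance from each node of the tree to all other nodes
--     # point bfs on diameter can also be used
--
--     n = len(dct)
--     sub = [[0, 0] for _ in range(n)]
--
--     # first bfs compute the largest distance and second large distance from bottom to up
--     stack = [(0, -1)]
--     while stack:
--         i, fa = stack.pop()
--         if i >= 0:
--             stack.append((~i, fa))
--             for j in dct[i]:
--                 if j != fa:
--                     stack.append((j, i))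
--         else:
--             i = ~i
--             a, b = sub[i]
--             for j in dct[i]:
--                 if j != fa:
--                     x = sub[j][0] + weights[j]
--                     if x >= a:
--                         a, b = x, a
--                     elif x >= b:
--                         b = x
--             sub[i] = [a, b]
--
--     # second bfs compute large distance from up to bottom
--     stack = [(0, -1, 0)]
--     ans = [s[0] for s in sub]
--     while stack:
--         i, fa, d = stack.pop()
--         ans[i] = ans[i] if ans[i] > d else d
--         for j in dct[i]:
--             if j != fa:
--                 nex = d
--                 x = sub[j][0] + weights[j]
--                 a, b = sub[i]
--                 # distance from current child nodes excluded
--                 if x == a: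
--                     nex = nex if nex > b else b
--                 else:
--                     nex = nex if nex > a else a
--                 stack.append((j, i, nex + weights[i]))
--     return ans
-- ===== SOURCE B (Python) =====
-- def get_tree_distance_max_weighted(dct, weights):
--     # Brute-force alternative: recover the tree's undirected edges by one walk
--     # from node 0 (the walk that defines the tree), then answer every node
--     # independently with its own DFS accumulating the node-weighted path sum
--     # (source weight excluded, floored at 0 by the initial best).
--     n = len(dct)
--     nbr = [[] for _ in range(n)]
--     stack = [(0, -1)]
--     while stack:
--         u, fa = stack.pop()
--         for v in dct[u]:
--             if v != fa:
--                 nbr[u].append(v)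
--                 nbr[v].append(u)
--                 stack.append((v, u))
--     ans = []
--     for i in range(n):
--         best = 0
--         stack = [(i, -1, 0)]
--         while stack:
--             u, fa, d = stack.pop()
--             if d > best:
--                 best = d
--             for v in nbr[u]:
--                 if v != fa:
--                     stack.append((v, u, d + weights[v]))
--         ans.append(best)
--     return ans
-- ===== Notes on version B (the rewrite author's own statement) =====
-- stated objective: alternative
-- what changed: A answers all nodes at once with a two-pass rerooting DP (downward best/second-best table, then upward propagation with the top-two exclusion trick); B drops the DP entirely: it recovers the tree's undirected edges by one walk from node 0 and then answers every node independently with its own exhaustive DFS over those edges, trading A's linear DP for a plain quadratic brute force. …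
-- outside the precondition, e.g. on get_tree_distance_max_weighted({0: [1, 1], 1: [0]}, [5, 7]): A returns [7, 12], B returns [7, 5]
import Mathlib
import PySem

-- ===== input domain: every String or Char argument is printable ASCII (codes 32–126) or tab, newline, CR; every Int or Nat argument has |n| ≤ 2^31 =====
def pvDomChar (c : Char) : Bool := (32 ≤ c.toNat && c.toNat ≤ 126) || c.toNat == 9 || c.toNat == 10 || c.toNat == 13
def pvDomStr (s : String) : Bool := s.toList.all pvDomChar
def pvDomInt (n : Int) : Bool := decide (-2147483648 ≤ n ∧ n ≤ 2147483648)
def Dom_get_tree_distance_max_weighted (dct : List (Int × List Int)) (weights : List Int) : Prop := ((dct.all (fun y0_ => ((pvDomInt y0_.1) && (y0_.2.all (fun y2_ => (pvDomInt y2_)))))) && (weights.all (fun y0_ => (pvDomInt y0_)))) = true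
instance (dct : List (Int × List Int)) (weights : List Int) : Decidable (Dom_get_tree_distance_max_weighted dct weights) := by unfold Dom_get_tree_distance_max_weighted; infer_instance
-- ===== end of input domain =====

-- B replaces A's two-pass rerooting DP by brute force (alternative, quadratic
-- instead of linear): it recovers the tree's undirected edges by one walk from
-- node 0 and answers each node independently with its own DFS over those edges.

-- ===== PORT A =====
-- first while loop: explicit stack of (i, fa); a pushed (~i, fa) marks the postorder
-- close step.  One unit of fuel per pop; the fuel is sufficient on every input the
-- claim admits (Pre_), where the loop pops exactly twice per node.
def pvA_loop1 (dct : List (Int × List Int)) (weights : List Int) :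
    Nat → List (Int × Int) → List (Int × Int) → List (Int × Int)
  | 0, _, sub => sub
  | _ + 1, [], sub => sub
  | f + 1, (i, fa) :: st, sub =>
    if 0 ≤ i then
      -- dct[i]: KeyError excluded by Pre_ (getD [] unreachable inside Pre_)
      let adj := ((PySem.Dict.mk dct).get? i).getD []
      pvA_loop1 dct weights f
        (adj.foldl (fun s j => if j ≠ fa then (j, i) :: s else s) (((-1) - i, fa) :: st)) sub
    else
      let i' := (-1) - i   -- i = ~i
      let adj := ((PySem.Dict.mk dct).get? i').getD []
      let ab :=
        adj.foldl (fun (ab : Int × Int) j =>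
          if j ≠ fa then
            let x := ((PySem.List.pyGet? sub j).getD (0, 0)).1 +
                     ((PySem.List.pyGet? weights j).getD 0)   -- IndexError excluded by Pre_
            if x ≥ ab.1 then (x, ab.1) else if x ≥ ab.2 then (ab.1, x) else ab
          else ab) ((PySem.List.pyGet? sub i').getD (0, 0))
      pvA_loop1 dct weights f st (sub.set i'.toNat ab)

-- second while loop: stack of (i, fa, d)
def pvA_loop2 (dct : List (Int × List Int)) (weights : List Int) (sub : List (Int × Int)) :
    Nat → List (Int × Int × Int) → List Int → List Int
  | 0, _, ans => ans
  | _ + 1, [], ans => ans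
  | f + 1, (i, fa, d) :: st, ans =>
    let ai := (PySem.List.pyGet? ans i).getD 0
    let ans1 := ans.set i.toNat (if ai > d then ai else d)
    let adj := ((PySem.Dict.mk dct).get? i).getD []
    pvA_loop2 dct weights sub f
      (adj.foldl (fun s j =>
        if j ≠ fa then
          let x := ((PySem.List.pyGet? sub j).getD (0, 0)).1 +
                   ((PySem.List.pyGet? weights j).getD 0)
          let ab := (PySem.List.pyGet? sub i).getD (0, 0)
          let nex := if x = ab.1 then (if d > ab.2 then d else ab.2)
                     else (if d > ab.1 then d else ab.1)
          (j, i, nex + ((PySem.List.pyGet? weights i).getD 0)) :: s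
        else s) st) ans1

def get_tree_distance_max_weighted (dct : List (Int × List Int)) (weights : List Int) : List Int :=
  let n := dct.length
  let sub := pvA_loop1 dct weights ((n + 2) * (n + 2)) [(0, -1)]
    (List.replicate n ((0 : Int), (0 : Int)))
  pvA_loop2 dct weights sub ((n + 2) * (n + 2)) [((0 : Int), (-1 : Int), (0 : Int))]
    (sub.map (·.1))

-- ===== PORT B =====
-- nbr[i].append(x): read nbr[i] (IndexError = none, unreachable inside Pre_),
-- write back with the element appended (Python's negative-index rule via pySetD)
def pvAppendAt (nbr : List (List Int)) (i : Int) (x : Int) : List (List Int) :=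
  match PySem.List.pyGet? nbr i with
  | none => nbr
  | some l => PySem.List.pySetD nbr i (l ++ [x])

-- first while loop of Source B: recover the tree's undirected edges from node 0;
-- one unit of fuel per pop, sufficient on every input admitted by Pre_
def pvB_disc (dct : List (Int × List Int)) :
    Nat → List (Int × Int) → List (List Int) → List (List Int)
  | 0, _, nbr => nbr
  | _ + 1, [], nbr => nbr
  | f + 1, (u, fa) :: st, nbr =>
    let p := (((PySem.Dict.mk dct).get? u).getD []).foldl
      (fun (p : List (Int × Int) × List (List Int)) v =>
        if v ≠ fa then ((v, u) :: p.1, pvAppendAt (pvAppendAt p.2 u v) v u) else p)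
      (st, nbr)
    pvB_disc dct f p.1 p.2

-- inner while loop of Source B: DFS from one source over the recovered edges
def pvB_far (nbr : List (List Int)) (weights : List Int) :
    Nat → List (Int × Int × Int) → Int → Int
  | 0, _, best => best
  | _ + 1, [], best => best
  | f + 1, (u, fa, d) :: st, best =>
    let best1 := if d > best then d else best
    let adj := (PySem.List.pyGet? nbr u).getD []
    pvB_far nbr weights f
      (adj.foldl (fun s v =>
        if v ≠ fa then (v, u, d + ((PySem.List.pyGet? weights v).getD 0)) :: s else s) st)
      best1

def get_tree_distance_max_weighted_alt (dct : List (Int × List Int)) (weights : List Int) : List Int :=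
  let n := dct.length
  let nbr := pvB_disc dct ((n + 2) * (n + 2)) [(0, -1)] (List.replicate n ([] : List Int))
  (List.range n).map
    (fun (i : Nat) => pvB_far nbr weights ((n + 2) * (n + 2)) [((i : Int), (-1 : Int), (0 : Int))] 0)

-- ===== PRECONDITION & SPEC =====
-- the rooted tree the adjacency map unfolds to (a child never equals its parent;
-- fuel bounds the unfolding depth)
mutual
inductive pvRTree : Type where
  | node : Int → pvForest → pvRTree
inductive pvForest : Type where
  | nil : pvForest
  | cons : pvRTree → pvForest → pvForest
end

mutual
def pvBuildT (dct : List (Int × List Int)) : Nat → Int → Int → Option pvRTree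
  | 0, _, _ => none
  | f + 1, i, fa =>
    match (PySem.Dict.mk dct).get? i with
    | none => none
    | some adj => (pvBuildF dct f (adj.filter (· ≠ fa)) i).map (pvRTree.node i)
def pvBuildF (dct : List (Int × List Int)) : Nat → List Int → Int → Option pvForest
  | _, [], _ => some .nil
  | 0, _ :: _, _ => none
  | f + 1, j :: js, i =>
    match pvBuildT dct f j i, pvBuildF dct f js i with
    | some t, some ts => some (.cons t ts)
    | _, _ => none
end

mutual
def pvLabelsT : pvRTree → List Int
  | .node i ts => i :: pvLabelsF ts
def pvLabelsF : pvForest → List Int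
  | .nil => []
  | .cons t ts => pvLabelsT t ++ pvLabelsF ts
end

-- Pre_ admits exactly the inputs on which unfolding the adjacency map from node 0
-- (skipping the arrival edge, exactly as A walks it) yields a finite tree with
-- distinct in-range labels, with a weight for every tree node when the tree has
-- more than one node.  Outside this tree domain A raises (KeyError/IndexError),
-- loops forever, or returns values shaped by revisits and Python's
-- negative-index wraparound.
def Pre_get_tree_distance_max_weighted (dct : List (Int × List Int)) (weights : List Int) : Prop :=
  (match pvBuildT dct (2 * dct.length + 2) 0 (-1) with
   | none => false
   | some t =>
      let ls := pvLabelsT t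
      decide ls.Nodup
        && ls.all (fun u => decide (0 ≤ u) && decide (u < (dct.length : Int)))
        && (decide (ls.length ≤ 1) || ls.all (fun u => decide (u < (weights.length : Int))))) = true

instance (dct : List (Int × List Int)) (weights : List Int) :
    Decidable (Pre_get_tree_distance_max_weighted dct weights) := by
  unfold Pre_get_tree_distance_max_weighted; infer_instance

def pvWitness_get_tree_distance_max_weighted : (List (Int × List Int)) × List Int :=
  ([(0, [1, 2]), (1, [0]), (2, [0, 3]), (3, [2])], [5, -2, 3, 4])

def Spec_get_tree_distance_max_weighted (dct : List (Int × List Int)) (weights : List Int) (out : List Int) : Prop := out = get_tree_distance_max_weighted_alt dct weights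
instance (dct : List (Int × List Int)) (weights : List Int) (out : List Int) : Decidable (Spec_get_tree_distance_max_weighted dct weights out) := by unfold Spec_get_tree_distance_max_weighted; infer_instance

-- ===== CLAIM (what is proved, stated in full; the proofs are below) =====
def Claim_equal_get_tree_distance_max_weighted : Prop := ∀ (dct : List (Int × List Int)) (weights : List Int), Dom_get_tree_distance_max_weighted dct weights → Pre_get_tree_distance_max_weighted dct weights → Spec_get_tree_distance_max_weighted dct weights (get_tree_distance_max_weighted dct weights)

-- ===== LEMMAS AND PROOFS =====

-- ---------- basic tree functions ----------
def pvRoot : pvRTree → Int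
  | .node i _ => i

-- all subtrees, each with the parent label it hangs from
mutual
def pvSubsT : pvRTree → Int → List (pvRTree × Int)
  | .node i ts, fa => (.node i ts, fa) :: pvSubsF ts i
def pvSubsF : pvForest → Int → List (pvRTree × Int)
  | .nil, _ => []
  | .cons c cs, i => pvSubsT c i ++ pvSubsF cs i
end

def pvToList : pvForest → List pvRTree
  | .nil => []
  | .cons t ts => t :: pvToList ts

mutual
def pvSizeT : pvRTree → Nat
  | .node _ ts => pvSizeF ts + 1
def pvSizeF : pvForest → Nat
  | .nil => 0
  | .cons t ts => pvSizeT t + pvSizeF ts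
end

@[simp] theorem pvRoot_node (i : Int) (ts : pvForest) : pvRoot (.node i ts) = i := by
  rw [pvRoot]

def pvRootsF (ts : pvForest) : List Int := (pvToList ts).map pvRoot

-- top-two accumulator step (the if-chain both Pythons' first passes use)
def pvStep (ab : Int × Int) (x : Int) : Int × Int :=
  if x ≥ ab.1 then (x, ab.1) else if x ≥ ab.2 then (ab.1, x) else ab

-- downward spec: (best, second-best) weighted depth below a node
mutual
def pvDV (weights : List Int) : pvRTree → Int × Int
  | .node _ ts => pvDVF weights ts (0, 0)
def pvDVF (weights : List Int) : pvForest → Int × Int → Int × Int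
  | .nil, ab => ab
  | .cons c cs, ab =>
      pvDVF weights cs (pvStep ab ((pvDV weights c).1 + (PySem.List.pyGet? weights (pvRoot c)).getD 0))
end

-- built-ness: the tree is what the graph unfolds to
def pvBuiltT (dct : List (Int × List Int)) (i fa : Int) (t : pvRTree) : Prop :=
  ∃ f, pvBuildT dct f i fa = some t
def pvBuiltF (dct : List (Int × List Int)) (i : Int) (ts : pvForest) : Prop :=
  ∃ f, pvBuildF dct f (pvRootsF ts) i = some ts

-- ---------- build inversion ----------
theorem pvBuildT_root_eq (dct : List (Int × List Int)) (f : Nat) (i fa : Int) (t : pvRTree)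
    (h : pvBuildT dct f i fa = some t) : pvRoot t = i := by
  cases f with
  | zero => simp [pvBuildT] at h
  | succ f =>
    rw [pvBuildT] at h
    cases hg : (PySem.Dict.mk dct).get? i with
    | none => rw [hg] at h; simp at h
    | some adj =>
      rw [hg] at h; dsimp only at h
      cases hb : pvBuildF dct f (adj.filter (· ≠ fa)) i with
      | none => rw [hb] at h; simp at h
      | some ts => rw [hb] at h; simp at h; subst h; rfl

theorem pvBuildF_roots (dct : List (Int × List Int)) (f : Nat) (js : List Int) (i : Int)
    (ts : pvForest) (h : pvBuildF dct f js i = some ts) : js = pvRootsF ts := by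
  induction js generalizing ts f with
  | nil =>
    cases f <;> (rw [pvBuildF] at h; injection h with h; subst h; rfl)
  | cons j js ih =>
    cases f with
    | zero => rw [pvBuildF] at h; exact absurd h (by simp)
    | succ f =>
      rw [pvBuildF] at h
      cases ht : pvBuildT dct f j i with
      | none => rw [ht] at h; simp at h
      | some t =>
        cases hf : pvBuildF dct f js i with
        | none => rw [ht, hf] at h; simp at h
        | some ts' =>
          rw [ht, hf] at h
          injection h with h; subst h
          have hr := pvBuildT_root_eq dct f j i t ht
          simp only [pvRootsF, pvToList, List.map_cons]
          rw [hr]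
          have := ih f ts' hf
          simp only [pvRootsF] at this
          rw [← this]

theorem pvBuiltT_inv (dct : List (Int × List Int)) (i fa : Int) (ts : pvForest)
    (h : pvBuiltT dct i fa (.node i ts)) :
    (∃ adj, (PySem.Dict.mk dct).get? i = some adj ∧ adj.filter (· ≠ fa) = pvRootsF ts) ∧
      pvBuiltF dct i ts := by
  obtain ⟨f, h⟩ := h
  cases f with
  | zero => simp [pvBuildT] at h
  | succ f =>
    rw [pvBuildT] at h
    cases hg : (PySem.Dict.mk dct).get? i with
    | none => rw [hg] at h; simp at h
    | some adj =>
      rw [hg] at h; dsimp only at h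
      cases hb : pvBuildF dct f (adj.filter (· ≠ fa)) i with
      | none => rw [hb] at h; simp at h
      | some ts' =>
        rw [hb] at h
        simp at h
        subst h
        have hroots := pvBuildF_roots dct f _ i _ hb
        exact ⟨⟨adj, rfl, hroots⟩, ⟨f, by rw [← hroots]; exact hb⟩⟩

theorem pvBuiltT_root (dct : List (Int × List Int)) (i fa : Int) (t : pvRTree)
    (h : pvBuiltT dct i fa t) : pvRoot t = i := by
  obtain ⟨f, h⟩ := h; exact pvBuildT_root_eq dct f i fa t h

theorem pvBuiltF_cons (dct : List (Int × List Int)) (i : Int) (c : pvRTree) (cs : pvForest)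
    (h : pvBuiltF dct i (.cons c cs)) :
    pvBuiltT dct (pvRoot c) i c ∧ pvBuiltF dct i cs := by
  obtain ⟨f, h⟩ := h
  simp only [pvRootsF, pvToList, List.map_cons] at h
  cases f with
  | zero => rw [pvBuildF] at h; exact absurd h (by simp)
  | succ f =>
    rw [pvBuildF] at h
    cases ht : pvBuildT dct f (pvRoot c) i with
    | none => rw [ht] at h; simp at h
    | some t =>
      cases hf : pvBuildF dct f ((pvToList cs).map pvRoot) i with
      | none => rw [ht, hf] at h; simp at h
      | some ts' =>
        rw [ht, hf] at h
        injection h with h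
        injection h with h1 h2
        subst h1; subst h2
        exact ⟨⟨f, ht⟩, ⟨f, by simpa [pvRootsF] using hf⟩⟩

-- ---------- A side: the first stack loop computes pvDV ----------
def pvCloseAB (dct : List (Int × List Int)) (weights : List Int) (i fa : Int)
    (sub : List (Int × Int)) : Int × Int :=
  (((PySem.Dict.mk dct).get? i).getD []).foldl (fun (ab : Int × Int) j =>
    if j ≠ fa then
      let x := ((PySem.List.pyGet? sub j).getD (0, 0)).1 + ((PySem.List.pyGet? weights j).getD 0)
      if x ≥ ab.1 then (x, ab.1) else if x ≥ ab.2 then (ab.1, x) else ab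
    else ab) ((PySem.List.pyGet? sub i).getD (0, 0))

mutual
def pvApplyT (dct : List (Int × List Int)) (weights : List Int) :
    pvRTree → Int → List (Int × Int) → List (Int × Int)
  | .node i ts, fa, sub =>
      let s' := pvApplyF dct weights ts i sub
      s'.set i.toNat (pvCloseAB dct weights i fa s')
def pvApplyF (dct : List (Int × List Int)) (weights : List Int) :
    pvForest → Int → List (Int × Int) → List (Int × Int)
  | .nil, _, sub => sub
  | .cons c cs, i, sub => pvApplyT dct weights c i (pvApplyF dct weights cs i sub)
end

def pvRevTasks (ts : pvForest) (i : Int) : List (Int × Int) :=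
  (pvRootsF ts).reverse.map (fun j => (j, i))

theorem pvPush_eq (fa i : Int) (adj : List Int) (X : List (Int × Int)) :
    adj.foldl (fun s j => if j ≠ fa then (j, i) :: s else s) X
      = ((adj.filter (· ≠ fa)).reverse.map (fun j => (j, i))) ++ X := by
  induction adj generalizing X with
  | nil => simp
  | cons a adj ih =>
    rw [List.foldl_cons, List.filter_cons]
    by_cases h : a = fa
    · rw [if_neg (by simp [h]), if_neg (by simp [h]), ih]
    · rw [if_pos h, if_pos (by simp [h]), ih ((a, i) :: X)]
      simp

theorem pvA_loop1_nil (dct : List (Int × List Int)) (weights : List Int) (f : Nat)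
    (sub : List (Int × Int)) : pvA_loop1 dct weights f [] sub = sub := by
  cases f <;> rfl

mutual
theorem pvRunT (dct : List (Int × List Int)) (weights : List Int) (t : pvRTree) (fa : Int)
    (hb : pvBuiltT dct (pvRoot t) fa t) (hlab : ∀ u ∈ pvLabelsT t, 0 ≤ u)
    (f : Nat) (rest : List (Int × Int)) (sub : List (Int × Int)) :
    pvA_loop1 dct weights (2 * pvSizeT t + f) ((pvRoot t, fa) :: rest) sub
      = pvA_loop1 dct weights f rest (pvApplyT dct weights t fa sub) := by
  cases t with
  | node i ts =>
    have hroot0 : (0 : Int) ≤ i := hlab i (by simp [pvLabelsT])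
    obtain ⟨⟨adj, hg, hfilter⟩, hbf⟩ := pvBuiltT_inv dct i fa ts (by simpa [pvRoot] using hb)
    have hfuel : 2 * pvSizeT (.node i ts) + f = (2 * pvSizeF ts + (f + 1)) + 1 := by
      simp [pvSizeT]; ring
    rw [hfuel]
    show pvA_loop1 dct weights ((2 * pvSizeF ts + (f + 1)) + 1) ((i, fa) :: rest) sub = _
    rw [pvA_loop1]
    rw [if_pos hroot0]
    simp only [hg, Option.getD_some]
    rw [pvPush_eq fa i adj (((-1) - i, fa) :: rest), hfilter]
    have : ((pvRootsF ts).reverse.map (fun j => (j, i))) ++ (((-1) - i, fa) :: rest)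
        = pvRevTasks ts i ++ (((-1) - i, fa) :: rest) := rfl
    rw [this]
    rw [pvRunF dct weights ts i hbf (fun u hu => hlab u (by simp [pvLabelsT, hu]))]
    rw [pvA_loop1]
    rw [if_neg (by omega)]
    have hii : (-1 : Int) - ((-1) - i) = i := by ring
    simp only [hii]
    rfl
theorem pvRunF (dct : List (Int × List Int)) (weights : List Int) (ts : pvForest) (i : Int)
    (hb : pvBuiltF dct i ts) (hlab : ∀ u ∈ pvLabelsF ts, 0 ≤ u)
    (f : Nat) (rest : List (Int × Int)) (sub : List (Int × Int)) :
    pvA_loop1 dct weights (2 * pvSizeF ts + f) (pvRevTasks ts i ++ rest) sub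
      = pvA_loop1 dct weights f rest (pvApplyF dct weights ts i sub) := by
  cases ts with
  | nil => simp [pvRevTasks, pvRootsF, pvToList, pvSizeF, pvApplyF]
  | cons c cs =>
    obtain ⟨hbc, hbcs⟩ := pvBuiltF_cons dct i c cs hb
    have hsplit : pvRevTasks (.cons c cs) i ++ rest
        = pvRevTasks cs i ++ ((pvRoot c, i) :: rest) := by
      simp [pvRevTasks, pvRootsF, pvToList]
    have hfuel : 2 * pvSizeF (.cons c cs) + f = 2 * pvSizeF cs + (2 * pvSizeT c + f) := by
      simp [pvSizeF]; ring
    rw [hsplit, hfuel]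
    rw [pvRunF dct weights cs i hbcs (fun u hu => hlab u (by simp [pvLabelsF, hu]))]
    rw [pvRunT dct weights c i hbc (fun u hu => hlab u (by simp [pvLabelsF, hu]))]
    rfl
end

-- ---------- labels / subtree helper lemmas ----------
@[simp] theorem pvLabelsT_node (i : Int) (ts : pvForest) :
    pvLabelsT (.node i ts) = i :: pvLabelsF ts := by rw [pvLabelsT]
@[simp] theorem pvLabelsF_nil : pvLabelsF .nil = [] := by rw [pvLabelsF]
@[simp] theorem pvLabelsF_cons (c : pvRTree) (cs : pvForest) :
    pvLabelsF (.cons c cs) = pvLabelsT c ++ pvLabelsF cs := by rw [pvLabelsF]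

mutual
theorem pvSubsT_root_mem (t : pvRTree) (fa : Int) :
    ∀ p ∈ pvSubsT t fa, pvRoot p.1 ∈ pvLabelsT t := by
  cases t with
  | node i ts =>
    intro p hp
    rw [pvSubsT] at hp
    rcases List.mem_cons.1 hp with hp | hp
    · simp [hp, pvRoot]
    · simp only [pvLabelsT_node, List.mem_cons]
      exact Or.inr (pvSubsF_root_mem ts i p hp)
theorem pvSubsF_root_mem (ts : pvForest) (i : Int) :
    ∀ p ∈ pvSubsF ts i, pvRoot p.1 ∈ pvLabelsF ts := by
  cases ts with
  | nil => intro p hp; rw [pvSubsF] at hp; simp at hp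
  | cons c cs =>
    intro p hp
    rw [pvSubsF] at hp
    rcases List.mem_append.1 hp with hp | hp
    · simp only [pvLabelsF_cons, List.mem_append]
      exact Or.inl (pvSubsT_root_mem c i p hp)
    · simp only [pvLabelsF_cons, List.mem_append]
      exact Or.inr (pvSubsF_root_mem cs i p hp)
end

theorem pvMem_subsF_of_toList (ts : pvForest) (i : Int) (c : pvRTree)
    (hc : c ∈ pvToList ts) : (c, i) ∈ pvSubsF ts i := by
  cases ts with
  | nil => rw [pvToList] at hc; simp at hc
  | cons t ts =>
    rw [pvToList] at hc
    rw [pvSubsF]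
    rcases List.mem_cons.1 hc with rfl | hc
    · apply List.mem_append_left
      cases c with
      | node j cs => rw [pvSubsT]; exact List.mem_cons_self
    · exact List.mem_append_right _ (pvMem_subsF_of_toList ts i c hc)

mutual
theorem pvApplyT_length (dct : List (Int × List Int)) (weights : List Int) (t : pvRTree)
    (fa : Int) (sub : List (Int × Int)) :
    (pvApplyT dct weights t fa sub).length = sub.length := by
  cases t with
  | node i ts =>
    rw [pvApplyT]
    simp [pvApplyF_length dct weights ts i sub]
theorem pvApplyF_length (dct : List (Int × List Int)) (weights : List Int) (ts : pvForest)
    (i : Int) (sub : List (Int × Int)) :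
    (pvApplyF dct weights ts i sub).length = sub.length := by
  cases ts with
  | nil => rw [pvApplyF]
  | cons c cs =>
    rw [pvApplyF]
    rw [pvApplyT_length, pvApplyF_length]
end

-- guarded foldl = foldl over filter
theorem pvFoldl_guard {α : Type} (fa : Int) (F : α → Int → α) (adj : List Int) (z : α) :
    adj.foldl (fun ab j => if j ≠ fa then F ab j else ab) z
      = (adj.filter (· ≠ fa)).foldl F z := by
  induction adj generalizing z with
  | nil => rfl
  | cons a adj ih =>
    rw [List.foldl_cons, List.filter_cons]
    by_cases h : a = fa
    · rw [if_neg (by simp [h]), if_neg (by simp [h]), ih]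
    · rw [if_pos h, if_pos (by simp [h]), List.foldl_cons, ih]

-- evaluating the close fold over the children roots
theorem pvFold_roots_eval (weights : List Int) (ts : pvForest) (s' : List (Int × Int))
    (hvals : ∀ c ∈ pvToList ts, PySem.List.pyGet? s' (pvRoot c) = some (pvDV weights c)) :
    ∀ ab : Int × Int,
      (pvRootsF ts).foldl (fun (ab : Int × Int) j =>
          let x := ((PySem.List.pyGet? s' j).getD (0, 0)).1 + ((PySem.List.pyGet? weights j).getD 0)
          if x ≥ ab.1 then (x, ab.1) else if x ≥ ab.2 then (ab.1, x) else ab) ab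
        = pvDVF weights ts ab := by
  cases ts with
  | nil => intro ab; rw [pvDVF]; rfl
  | cons c cs =>
    intro ab
    have hc : PySem.List.pyGet? s' (pvRoot c) = some (pvDV weights c) :=
      hvals c (by rw [pvToList]; exact List.mem_cons_self)
    have hroots : pvRootsF (.cons c cs) = pvRoot c :: pvRootsF cs := by
      simp [pvRootsF, pvToList]
    rw [hroots, List.foldl_cons, pvDVF]
    rw [pvFold_roots_eval weights cs s'
      (fun c hc' => hvals c (by rw [pvToList]; exact List.mem_cons_of_mem _ hc'))]
    congr 1
    simp only [hc, Option.getD_some, pvStep]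

theorem pvCloseAB_eval (dct : List (Int × List Int)) (weights : List Int) (i fa : Int)
    (ts : pvForest) (s' : List (Int × Int)) (adj : List Int)
    (hg : (PySem.Dict.mk dct).get? i = some adj)
    (hfilter : adj.filter (· ≠ fa) = pvRootsF ts)
    (hvals : ∀ c ∈ pvToList ts, PySem.List.pyGet? s' (pvRoot c) = some (pvDV weights c))
    (h0i : PySem.List.pyGet? s' i = some ((0 : Int), (0 : Int))) :
    pvCloseAB dct weights i fa s' = pvDV weights (.node i ts) := by
  rw [pvCloseAB, hg]
  simp only [Option.getD_some, h0i]
  rw [pvFoldl_guard, hfilter]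
  rw [pvDV]
  exact pvFold_roots_eval weights ts s' hvals ((0, 0))

mutual
theorem pvApplyT_spec (dct : List (Int × List Int)) (weights : List Int) (t : pvRTree)
    (fa : Int) (sub : List (Int × Int))
    (hb : pvBuiltT dct (pvRoot t) fa t)
    (hnd : (pvLabelsT t).Nodup)
    (hlab : ∀ u ∈ pvLabelsT t, 0 ≤ u ∧ u.toNat < sub.length)
    (h0 : ∀ u ∈ pvLabelsT t, PySem.List.pyGet? sub u = some ((0 : Int), (0 : Int))) :
    (∀ k : Nat, ((k : Int) ∉ pvLabelsT t) → (pvApplyT dct weights t fa sub)[k]? = sub[k]?)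
    ∧ (∀ p ∈ pvSubsT t fa,
        PySem.List.pyGet? (pvApplyT dct weights t fa sub) (pvRoot p.1)
          = some (pvDV weights p.1)) := by
  cases t with
  | node i ts =>
    obtain ⟨⟨adj, hg, hfilter⟩, hbf⟩ := pvBuiltT_inv dct i fa ts (by simpa [pvRoot] using hb)
    have hnd2 : (i : Int) ∉ pvLabelsF ts ∧ (pvLabelsF ts).Nodup := by simpa using hnd
    have hndf : (pvLabelsF ts).Nodup := hnd2.2
    have hi_not : (i : Int) ∉ pvLabelsF ts := hnd2.1
    have hi0 : 0 ≤ i ∧ i.toNat < sub.length := hlab i (by simp)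
    obtain ⟨hF_frame, hF_val⟩ := pvApplyF_spec dct weights ts i sub hbf hndf
      (fun u hu => hlab u (by simp [hu])) (fun u hu => h0 u (by simp [hu]))
    have hlenF : (pvApplyF dct weights ts i sub).length = sub.length :=
      pvApplyF_length dct weights ts i sub
    have hget_i : PySem.List.pyGet? (pvApplyF dct weights ts i sub) i = some ((0:Int), (0:Int)) := by
      rw [PySem.List.pyGet?_of_nonneg _ hi0.1, hF_frame i.toNat (by
        simpa [Int.toNat_of_nonneg hi0.1] using hi_not),
        ← PySem.List.pyGet?_of_nonneg _ hi0.1]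
      exact h0 i (by simp)
    have hclose : pvCloseAB dct weights i fa (pvApplyF dct weights ts i sub)
        = pvDV weights (.node i ts) := by
      apply pvCloseAB_eval dct weights i fa ts _ adj hg hfilter _ hget_i
      intro c hc
      exact hF_val (c, i) (pvMem_subsF_of_toList ts i c hc)
    constructor
    · intro k hk
      rw [pvApplyT]
      have hki : i.toNat ≠ k := by
        intro h
        apply hk
        simp only [pvLabelsT_node, List.mem_cons]
        left
        omega
      rw [List.getElem?_set_ne hki]
      exact hF_frame k (fun h => hk (by simp [h]))
    · intro p hp
      rw [pvSubsT] at hp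
      rcases List.mem_cons.1 hp with rfl | hp
      · rw [pvApplyT]
        simp only [pvRoot]
        rw [PySem.List.pyGet?_of_nonneg _ hi0.1]
        rw [List.getElem?_set_self (by rw [hlenF]; exact hi0.2)]
        rw [hclose]
      · have hroot_mem : pvRoot p.1 ∈ pvLabelsF ts := pvSubsF_root_mem ts i p hp
        have hr0 : 0 ≤ pvRoot p.1 ∧ (pvRoot p.1).toNat < sub.length :=
          hlab _ (by simp [hroot_mem])
        rw [pvApplyT]
        rw [PySem.List.pyGet?_of_nonneg _ hr0.1]
        rw [List.getElem?_set_ne (by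
          intro h
          apply hi_not
          have : i = pvRoot p.1 := by omega
          rw [this]; exact hroot_mem)]
        rw [← PySem.List.pyGet?_of_nonneg _ hr0.1]
        exact hF_val p hp
theorem pvApplyF_spec (dct : List (Int × List Int)) (weights : List Int) (ts : pvForest)
    (i : Int) (sub : List (Int × Int))
    (hb : pvBuiltF dct i ts)
    (hnd : (pvLabelsF ts).Nodup)
    (hlab : ∀ u ∈ pvLabelsF ts, 0 ≤ u ∧ u.toNat < sub.length)
    (h0 : ∀ u ∈ pvLabelsF ts, PySem.List.pyGet? sub u = some ((0 : Int), (0 : Int))) :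
    (∀ k : Nat, ((k : Int) ∉ pvLabelsF ts) → (pvApplyF dct weights ts i sub)[k]? = sub[k]?)
    ∧ (∀ p ∈ pvSubsF ts i,
        PySem.List.pyGet? (pvApplyF dct weights ts i sub) (pvRoot p.1)
          = some (pvDV weights p.1)) := by
  cases ts with
  | nil =>
    constructor
    · intro k _; rw [pvApplyF]
    · intro p hp; rw [pvSubsF] at hp; simp at hp
  | cons c cs =>
    obtain ⟨hbc, hbcs⟩ := pvBuiltF_cons dct i c cs hb
    have hnd' : (pvLabelsT c).Nodup ∧ (pvLabelsF cs).Nodup ∧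
        (∀ u ∈ pvLabelsT c, u ∉ pvLabelsF cs) := by
      simp only [pvLabelsF_cons] at hnd
      have h3 := List.nodup_append.1 hnd
      exact ⟨h3.1, h3.2.1, fun u hu hv => h3.2.2 u hu u hv rfl⟩
    obtain ⟨hcs_frame, hcs_val⟩ := pvApplyF_spec dct weights cs i sub hbcs hnd'.2.1
      (fun u hu => hlab u (by simp [hu])) (fun u hu => h0 u (by simp [hu]))
    have hlencs : (pvApplyF dct weights cs i sub).length = sub.length :=
      pvApplyF_length dct weights cs i sub
    obtain ⟨hc_frame, hc_val⟩ := pvApplyT_spec dct weights c i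
      (pvApplyF dct weights cs i sub) hbc hnd'.1
      (fun u hu => by rw [hlencs]; exact hlab u (by simp [hu]))
      (fun u hu => by
        have h0u := hlab u (by simp [hu])
        rw [PySem.List.pyGet?_of_nonneg _ h0u.1,
          hcs_frame u.toNat (by simpa [Int.toNat_of_nonneg h0u.1] using hnd'.2.2 u hu),
          ← PySem.List.pyGet?_of_nonneg _ h0u.1]
        exact h0 u (by simp [hu]))
    constructor
    · intro k hk
      rw [pvApplyF]
      rw [hc_frame k (fun h => hk (by simp [h]))]
      exact hcs_frame k (fun h => hk (by simp [h]))
    · intro p hp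
      rw [pvSubsF] at hp
      rcases List.mem_append.1 hp with hp | hp
      · rw [pvApplyF]
        exact hc_val p hp
      · have hroot_mem : pvRoot p.1 ∈ pvLabelsF cs := pvSubsF_root_mem cs i p hp
        have hr0 : 0 ≤ pvRoot p.1 ∧ (pvRoot p.1).toNat < sub.length :=
          hlab _ (by simp [hroot_mem])
        rw [pvApplyF]
        rw [PySem.List.pyGet?_of_nonneg _ hr0.1]
        rw [hc_frame (pvRoot p.1).toNat (by
          intro h
          have : pvRoot p.1 ∈ pvLabelsT c := by
            rwa [Int.toNat_of_nonneg hr0.1] at h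
          exact hnd'.2.2 _ this hroot_mem)]
        rw [← PySem.List.pyGet?_of_nonneg _ hr0.1]
        exact hcs_val p hp
end

-- ---------- A side: the second stack loop ----------
def pvNex (sub : List (Int × Int)) (weights : List Int) (i j d : Int) : Int :=
  let x := ((PySem.List.pyGet? sub j).getD (0, 0)).1 + ((PySem.List.pyGet? weights j).getD 0)
  let ab := (PySem.List.pyGet? sub i).getD (0, 0)
  let nex := if x = ab.1 then (if d > ab.2 then d else ab.2) else (if d > ab.1 then d else ab.1)
  nex + ((PySem.List.pyGet? weights i).getD 0)

mutual
def pvApply2T (weights : List Int) (sub : List (Int × Int)) :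
    pvRTree → Int → List Int → List Int
  | .node i ts, d, ans =>
      pvApply2F weights sub ts i d
        (ans.set i.toNat
          (let ai := (PySem.List.pyGet? ans i).getD 0; if ai > d then ai else d))
def pvApply2F (weights : List Int) (sub : List (Int × Int)) :
    pvForest → Int → Int → List Int → List Int
  | .nil, _, _, ans => ans
  | .cons c cs, i, d, ans =>
      pvApply2T weights sub c (pvNex sub weights i (pvRoot c) d)
        (pvApply2F weights sub cs i d ans)
end

def pvRevTasks2 (sub : List (Int × Int)) (weights : List Int) (ts : pvForest) (i d : Int) :
    List (Int × Int × Int) :=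
  (pvRootsF ts).reverse.map (fun j => (j, i, pvNex sub weights i j d))

theorem pvPushG_eq {β : Type} (fa : Int) (g : Int → β) (adj : List Int) (X : List β) :
    adj.foldl (fun s j => if j ≠ fa then g j :: s else s) X
      = ((adj.filter (· ≠ fa)).reverse.map g) ++ X := by
  induction adj generalizing X with
  | nil => simp
  | cons a adj ih =>
    rw [List.foldl_cons, List.filter_cons]
    by_cases h : a = fa
    · rw [if_neg (by simp [h]), if_neg (by simp [h]), ih]
    · rw [if_pos h, if_pos (by simp [h]), ih (g a :: X)]
      simp

theorem pvA_loop2_nil (dct : List (Int × List Int)) (weights : List Int)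
    (sub : List (Int × Int)) (f : Nat) (ans : List Int) :
    pvA_loop2 dct weights sub f [] ans = ans := by
  cases f <;> rfl

mutual
theorem pvRun2T (dct : List (Int × List Int)) (weights : List Int) (sub : List (Int × Int))
    (t : pvRTree) (fa d : Int)
    (hb : pvBuiltT dct (pvRoot t) fa t)
    (f : Nat) (rest : List (Int × Int × Int)) (ans : List Int) :
    pvA_loop2 dct weights sub (pvSizeT t + f) ((pvRoot t, fa, d) :: rest) ans
      = pvA_loop2 dct weights sub f rest (pvApply2T weights sub t d ans) := by
  cases t with
  | node i ts =>
    obtain ⟨⟨adj, hg, hfilter⟩, hbf⟩ := pvBuiltT_inv dct i fa ts (by simpa [pvRoot] using hb)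
    have hfuel : pvSizeT (.node i ts) + f = pvSizeF ts + f + 1 := by
      rw [pvSizeT]; ring
    rw [hfuel]
    show pvA_loop2 dct weights sub (pvSizeF ts + f + 1) ((i, fa, d) :: rest) ans = _
    rw [pvA_loop2]
    simp only [hg, Option.getD_some]
    have hbody : (fun (s : List (Int × Int × Int)) (j : Int) =>
        if j ≠ fa then
          let x := ((PySem.List.pyGet? sub j).getD (0, 0)).1 +
                   ((PySem.List.pyGet? weights j).getD 0)
          let ab := (PySem.List.pyGet? sub i).getD (0, 0)
          let nex := if x = ab.1 then (if d > ab.2 then d else ab.2)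
                     else (if d > ab.1 then d else ab.1)
          (j, i, nex + ((PySem.List.pyGet? weights i).getD 0)) :: s
        else s)
        = (fun s j => if j ≠ fa then (j, i, pvNex sub weights i j d) :: s else s) := by
      funext s j
      by_cases h : j ≠ fa
      · simp only [if_pos h, pvNex]
      · simp only [if_neg h]
    rw [hbody, pvPushG_eq fa _ adj, hfilter]
    have : ((pvRootsF ts).reverse.map (fun j => (j, i, pvNex sub weights i j d))) ++ rest
        = pvRevTasks2 sub weights ts i d ++ rest := rfl
    rw [this]
    rw [pvRun2F dct weights sub ts i d hbf]
    rfl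
theorem pvRun2F (dct : List (Int × List Int)) (weights : List Int) (sub : List (Int × Int))
    (ts : pvForest) (i d : Int)
    (hb : pvBuiltF dct i ts)
    (f : Nat) (rest : List (Int × Int × Int)) (ans : List Int) :
    pvA_loop2 dct weights sub (pvSizeF ts + f) (pvRevTasks2 sub weights ts i d ++ rest) ans
      = pvA_loop2 dct weights sub f rest (pvApply2F weights sub ts i d ans) := by
  cases ts with
  | nil => simp [pvRevTasks2, pvRootsF, pvToList, pvSizeF, pvApply2F]
  | cons c cs =>
    obtain ⟨hbc, hbcs⟩ := pvBuiltF_cons dct i c cs hb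
    have hsplit : pvRevTasks2 sub weights (.cons c cs) i d ++ rest
        = pvRevTasks2 sub weights cs i d
            ++ ((pvRoot c, i, pvNex sub weights i (pvRoot c) d) :: rest) := by
      simp [pvRevTasks2, pvRootsF, pvToList]
    have hfuel : pvSizeF (.cons c cs) + f = pvSizeF cs + (pvSizeT c + f) := by
      rw [pvSizeF]; ring
    rw [hsplit, hfuel]
    rw [pvRun2F dct weights sub cs i d hbcs]
    rw [pvRun2T dct weights sub c i (pvNex sub weights i (pvRoot c) d) hbc]
    rfl
end

-- operational upward values (reading the sub array like the second loop does)
mutual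
def pvUpsOp (weights : List Int) (sub : List (Int × Int)) : pvRTree → Int → List (Int × Int)
  | .node i ts, d => (i, d) :: pvUpsOpF weights sub ts i d
def pvUpsOpF (weights : List Int) (sub : List (Int × Int)) : pvForest → Int → Int → List (Int × Int)
  | .nil, _, _ => []
  | .cons c cs, i, d =>
      pvUpsOp weights sub c (pvNex sub weights i (pvRoot c) d) ++ pvUpsOpF weights sub cs i d
end

mutual
theorem pvUpsOp_fst (weights : List Int) (sub : List (Int × Int)) (t : pvRTree) (d : Int) :
    (pvUpsOp weights sub t d).map Prod.fst = pvLabelsT t := by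
  cases t with
  | node i ts =>
    rw [pvUpsOp, pvLabelsT]
    simp only [List.map_cons]
    rw [pvUpsOpF_fst]
theorem pvUpsOpF_fst (weights : List Int) (sub : List (Int × Int)) (ts : pvForest) (i d : Int) :
    (pvUpsOpF weights sub ts i d).map Prod.fst = pvLabelsF ts := by
  cases ts with
  | nil => rw [pvUpsOpF, pvLabelsF]; rfl
  | cons c cs =>
    rw [pvUpsOpF, pvLabelsF]
    simp only [List.map_append]
    rw [pvUpsOp_fst, pvUpsOpF_fst]
end

theorem pvUpsOp_mem_fst (weights : List Int) (sub : List (Int × Int)) (t : pvRTree) (d : Int)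
    (q : Int × Int) (hq : q ∈ pvUpsOp weights sub t d) : q.1 ∈ pvLabelsT t := by
  rw [← pvUpsOp_fst weights sub t d]; exact List.mem_map_of_mem hq

theorem pvUpsOpF_mem_fst (weights : List Int) (sub : List (Int × Int)) (ts : pvForest)
    (i d : Int) (q : Int × Int) (hq : q ∈ pvUpsOpF weights sub ts i d) :
    q.1 ∈ pvLabelsF ts := by
  rw [← pvUpsOpF_fst weights sub ts i d]; exact List.mem_map_of_mem hq

mutual
theorem pvApply2T_length (weights : List Int) (sub : List (Int × Int)) (t : pvRTree)
    (d : Int) (ans : List Int) : (pvApply2T weights sub t d ans).length = ans.length := by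
  cases t with
  | node i ts => rw [pvApply2T, pvApply2F_length]; simp
theorem pvApply2F_length (weights : List Int) (sub : List (Int × Int)) (ts : pvForest)
    (i d : Int) (ans : List Int) :
    (pvApply2F weights sub ts i d ans).length = ans.length := by
  cases ts with
  | nil => rw [pvApply2F]
  | cons c cs => rw [pvApply2F, pvApply2T_length, pvApply2F_length]
end

mutual
theorem pvApply2T_spec (weights : List Int) (sub : List (Int × Int)) (t : pvRTree)
    (d : Int) (ans : List Int)
    (hnd : (pvLabelsT t).Nodup)
    (hlab : ∀ u ∈ pvLabelsT t, 0 ≤ u ∧ u.toNat < ans.length) :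
    (∀ k : Nat, ((k : Int) ∉ pvLabelsT t) → (pvApply2T weights sub t d ans)[k]? = ans[k]?)
    ∧ (∀ q ∈ pvUpsOp weights sub t d,
        PySem.List.pyGet? (pvApply2T weights sub t d ans) q.1
          = some (let a := (PySem.List.pyGet? ans q.1).getD 0; if a > q.2 then a else q.2)) := by
  cases t with
  | node i ts =>
    have hnd2 : (i : Int) ∉ pvLabelsF ts ∧ (pvLabelsF ts).Nodup := by simpa using hnd
    have hi0 : 0 ≤ i ∧ i.toNat < ans.length := hlab i (by simp)
    set v := (let ai := (PySem.List.pyGet? ans i).getD 0; if ai > d then ai else d) with hv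
    set ans' := ans.set i.toNat v with hans'
    have hlen' : ans'.length = ans.length := by rw [hans']; simp
    obtain ⟨hF_frame, hF_val⟩ := pvApply2F_spec weights sub ts i d ans' hnd2.2
      (fun u hu => by rw [hlen']; exact hlab u (by simp [hu]))
    have hresult : pvApply2T weights sub (.node i ts) d ans
        = pvApply2F weights sub ts i d ans' := by rw [pvApply2T]
    constructor
    · intro k hk
      rw [hresult, hF_frame k (fun h => hk (by simp [h])), hans']
      exact List.getElem?_set_ne (by
        intro h
        exact hk (by simp only [pvLabelsT_node, List.mem_cons]; left; omega))
    · intro q hq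
      rw [pvUpsOp] at hq
      rcases List.mem_cons.1 hq with rfl | hq
      · rw [hresult, PySem.List.pyGet?_of_nonneg _ hi0.1,
          hF_frame i.toNat (by simpa [Int.toNat_of_nonneg hi0.1] using hnd2.1), hans']
        rw [List.getElem?_set_self (by exact hi0.2)]
      · have hq1 : q.1 ∈ pvLabelsF ts := pvUpsOpF_mem_fst weights sub ts i d q hq
        have hq0 : 0 ≤ q.1 ∧ q.1.toNat < ans.length := hlab q.1 (by simp [hq1])
        have hne : q.1 ≠ i := by
          intro h; exact hnd2.1 (h ▸ hq1)
        have hget : PySem.List.pyGet? ans' q.1 = PySem.List.pyGet? ans q.1 := by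
          rw [PySem.List.pyGet?_of_nonneg _ hq0.1, PySem.List.pyGet?_of_nonneg _ hq0.1, hans']
          exact List.getElem?_set_ne (by omega)
        rw [hresult, hF_val q hq, hget]
theorem pvApply2F_spec (weights : List Int) (sub : List (Int × Int)) (ts : pvForest)
    (i d : Int) (ans : List Int)
    (hnd : (pvLabelsF ts).Nodup)
    (hlab : ∀ u ∈ pvLabelsF ts, 0 ≤ u ∧ u.toNat < ans.length) :
    (∀ k : Nat, ((k : Int) ∉ pvLabelsF ts) → (pvApply2F weights sub ts i d ans)[k]? = ans[k]?)
    ∧ (∀ q ∈ pvUpsOpF weights sub ts i d,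
        PySem.List.pyGet? (pvApply2F weights sub ts i d ans) q.1
          = some (let a := (PySem.List.pyGet? ans q.1).getD 0; if a > q.2 then a else q.2)) := by
  cases ts with
  | nil =>
    constructor
    · intro k _; rw [pvApply2F]
    · intro q hq; rw [pvUpsOpF] at hq; simp at hq
  | cons c cs =>
    have h3 : (pvLabelsT c).Nodup ∧ (pvLabelsF cs).Nodup ∧
        (∀ u ∈ pvLabelsT c, u ∉ pvLabelsF cs) := by
      simp only [pvLabelsF_cons] at hnd
      have h := List.nodup_append.1 hnd
      exact ⟨h.1, h.2.1, fun u hu hv => h.2.2 u hu u hv rfl⟩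
    obtain ⟨hcs_frame, hcs_val⟩ := pvApply2F_spec weights sub cs i d ans h3.2.1
      (fun u hu => hlab u (by simp [hu]))
    have hlencs : (pvApply2F weights sub cs i d ans).length = ans.length :=
      pvApply2F_length weights sub cs i d ans
    obtain ⟨hc_frame, hc_val⟩ := pvApply2T_spec weights sub c
      (pvNex sub weights i (pvRoot c) d) (pvApply2F weights sub cs i d ans) h3.1
      (fun u hu => by rw [hlencs]; exact hlab u (by simp [hu]))
    have hresult : pvApply2F weights sub (.cons c cs) i d ans
        = pvApply2T weights sub c (pvNex sub weights i (pvRoot c) d)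
            (pvApply2F weights sub cs i d ans) := by rw [pvApply2F]
    constructor
    · intro k hk
      rw [hresult, hc_frame k (fun h => hk (by simp [h]))]
      exact hcs_frame k (fun h => hk (by simp [h]))
    · intro q hq
      rw [pvUpsOpF] at hq
      rcases List.mem_append.1 hq with hq | hq
      · have hq1 : q.1 ∈ pvLabelsT c := pvUpsOp_mem_fst weights sub c _ q hq
        have hq0 : 0 ≤ q.1 ∧ q.1.toNat < ans.length := hlab q.1 (by simp [hq1])
        have hget : PySem.List.pyGet? (pvApply2F weights sub cs i d ans) q.1
            = PySem.List.pyGet? ans q.1 := by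
          rw [PySem.List.pyGet?_of_nonneg _ hq0.1, PySem.List.pyGet?_of_nonneg _ hq0.1]
          exact hcs_frame q.1.toNat (by
            rw [Int.toNat_of_nonneg hq0.1]
            intro h
            exact h3.2.2 q.1 hq1 h)
        rw [hresult, hc_val q hq, hget]
      · have hq1 : q.1 ∈ pvLabelsF cs := pvUpsOpF_mem_fst weights sub cs i d q hq
        have hq0 : 0 ≤ q.1 ∧ q.1.toNat < ans.length := hlab q.1 (by simp [hq1])
        rw [hresult, PySem.List.pyGet?_of_nonneg _ hq0.1]
        rw [hc_frame q.1.toNat (by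
          intro h
          have : q.1 ∈ pvLabelsT c := by rwa [Int.toNat_of_nonneg hq0.1] at h
          exact h3.2.2 q.1 this hq1)]
        rw [← PySem.List.pyGet?_of_nonneg _ hq0.1]
        exact hcs_val q hq
end

-- subtrees enriched with their parent label and the upward value entering them
mutual
def pvSubsU (weights : List Int) : pvRTree → Int → Int → List (pvRTree × Int × Int)
  | .node i ts, fa, d =>
      (.node i ts, fa, d) :: pvSubsUF weights ts (pvDVF weights ts (0, 0)) i d
def pvSubsUF (weights : List Int) :
    pvForest → Int × Int → Int → Int → List (pvRTree × Int × Int)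
  | .nil, _, _, _ => []
  | .cons c cs, ab, i, d =>
      let x := (pvDV weights c).1 + (PySem.List.pyGet? weights (pvRoot c)).getD 0
      let nex := if x = ab.1 then (if d > ab.2 then d else ab.2) else (if d > ab.1 then d else ab.1)
      pvSubsU weights c i (nex + (PySem.List.pyGet? weights i).getD 0)
        ++ pvSubsUF weights cs ab i d
end

mutual
theorem pvSubsU_proj (weights : List Int) (t : pvRTree) (fa d : Int) :
    (pvSubsU weights t fa d).map (fun e => (e.1, e.2.1)) = pvSubsT t fa := by
  cases t with
  | node i ts =>
    rw [pvSubsU, pvSubsT]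
    simp only [List.map_cons]
    rw [pvSubsUF_proj]
theorem pvSubsUF_proj (weights : List Int) (ts : pvForest) (ab : Int × Int) (i d : Int) :
    (pvSubsUF weights ts ab i d).map (fun e => (e.1, e.2.1)) = pvSubsF ts i := by
  cases ts with
  | nil => rw [pvSubsUF, pvSubsF]; rfl
  | cons c cs =>
    rw [pvSubsUF, pvSubsF]
    simp only [List.map_append]
    rw [pvSubsU_proj, pvSubsUF_proj]
end

-- the second-loop task values agree with the enriched spec once sub holds pvDV
mutual
theorem pvUpsOp_eq (weights : List Int) (sub : List (Int × Int)) (t : pvRTree) (fa d : Int)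
    (hsub : ∀ p ∈ pvSubsT t fa, PySem.List.pyGet? sub (pvRoot p.1) = some (pvDV weights p.1)) :
    pvUpsOp weights sub t d = (pvSubsU weights t fa d).map (fun e => (pvRoot e.1, e.2.2)) := by
  cases t with
  | node i ts =>
    rw [pvUpsOp, pvSubsU]
    simp only [List.map_cons, pvRoot_node]
    congr 1
    have hi : (PySem.List.pyGet? sub i).getD (0, 0) = pvDVF weights ts (0, 0) := by
      have h := hsub (pvRTree.node i ts, fa) (by rw [pvSubsT]; exact List.mem_cons_self)
      simp only [pvRoot_node] at h
      rw [h, pvDV]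
      rfl
    exact pvUpsOpF_eq weights sub ts i d (pvDVF weights ts (0, 0))
      (fun p hp => hsub p (by rw [pvSubsT]; exact List.mem_cons_of_mem _ hp)) hi
theorem pvUpsOpF_eq (weights : List Int) (sub : List (Int × Int)) (ts : pvForest) (i d : Int)
    (ab : Int × Int)
    (hsub : ∀ p ∈ pvSubsF ts i, PySem.List.pyGet? sub (pvRoot p.1) = some (pvDV weights p.1))
    (hi : (PySem.List.pyGet? sub i).getD (0, 0) = ab) :
    pvUpsOpF weights sub ts i d
      = (pvSubsUF weights ts ab i d).map (fun e => (pvRoot e.1, e.2.2)) := by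
  cases ts with
  | nil => rw [pvUpsOpF, pvSubsUF]; rfl
  | cons c cs =>
    rw [pvUpsOpF, pvSubsUF]
    simp only [List.map_append]
    have hc : PySem.List.pyGet? sub (pvRoot c) = some (pvDV weights c) := by
      apply hsub (c, i)
      rw [pvSubsF]
      apply List.mem_append_left
      cases c with
      | node j cj => rw [pvSubsT]; exact List.mem_cons_self
    have hnex : pvNex sub weights i (pvRoot c) d
        = (if (pvDV weights c).1 + (PySem.List.pyGet? weights (pvRoot c)).getD 0 = ab.1
            then (if d > ab.2 then d else ab.2) else (if d > ab.1 then d else ab.1))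
          + (PySem.List.pyGet? weights i).getD 0 := by
      rw [pvNex]
      simp only [hc, Option.getD_some, hi]
    congr 1
    · rw [hnex]
      exact pvUpsOp_eq weights sub c i _
        (fun p hp => hsub p (by rw [pvSubsF]; exact List.mem_append_left _ hp))
    · exact pvUpsOpF_eq weights sub cs i d ab
        (fun p hp => hsub p (by rw [pvSubsF]; exact List.mem_append_right _ hp)) hi
end

-- labels / roots of subtree entries
mutual
theorem pvSubs_labels_sublist_T (t : pvRTree) (fa : Int) :
    ∀ p ∈ pvSubsT t fa, (pvLabelsT p.1).Sublist (pvLabelsT t) := by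
  cases t with
  | node i ts =>
    intro p hp
    rw [pvSubsT] at hp
    rcases List.mem_cons.1 hp with rfl | hp
    · exact List.Sublist.refl _
    · rw [pvLabelsT_node]
      exact (pvSubs_labels_sublist_F ts i p hp).trans (List.sublist_cons_self _ _)
theorem pvSubs_labels_sublist_F (ts : pvForest) (i : Int) :
    ∀ p ∈ pvSubsF ts i, (pvLabelsT p.1).Sublist (pvLabelsF ts) := by
  cases ts with
  | nil => intro p hp; rw [pvSubsF] at hp; simp at hp
  | cons c cs =>
    intro p hp
    rw [pvSubsF] at hp
    rw [pvLabelsF_cons]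
    rcases List.mem_append.1 hp with hp | hp
    · exact (pvSubs_labels_sublist_T c i p hp).trans (List.sublist_append_left _ _)
    · exact (pvSubs_labels_sublist_F cs i p hp).trans (List.sublist_append_right _ _)
end

mutual
theorem pvSubs_roots_T (t : pvRTree) (fa : Int) :
    (pvSubsT t fa).map (fun p => pvRoot p.1) = pvLabelsT t := by
  cases t with
  | node i ts =>
    rw [pvSubsT, pvLabelsT]
    simp only [List.map_cons, pvRoot_node]
    rw [pvSubs_roots_F ts i]
theorem pvSubs_roots_F (ts : pvForest) (i : Int) :
    (pvSubsF ts i).map (fun p => pvRoot p.1) = pvLabelsF ts := by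
  cases ts with
  | nil => rw [pvSubsF, pvLabelsF]; rfl
  | cons c cs =>
    rw [pvSubsF, pvLabelsF]
    simp only [List.map_append]
    rw [pvSubs_roots_T c i, pvSubs_roots_F cs i]
end

-- ---------- max-fold utilities ----------
theorem pvM0_init_le (l : List Int) : ∀ a : Int, a ≤ l.foldl max a := by
  induction l with
  | nil => intro a; simp
  | cons x l ih =>
    intro a
    rw [List.foldl_cons]
    exact le_trans (le_max_left a x) (ih (max a x))

theorem pvM0_acc (l : List Int) : ∀ a b : Int, l.foldl max (max a b) = max a (l.foldl max b) := by
  induction l with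
  | nil => intro a b; simp
  | cons x l ih =>
    intro a b
    rw [List.foldl_cons, List.foldl_cons]
    rw [max_assoc, ih]

theorem pvM0_cons (x : Int) (l : List Int) :
    (x :: l).foldl max 0 = max x (l.foldl max 0) := by
  rw [List.foldl_cons, max_comm (0 : Int) x, pvM0_acc]

theorem pvM0_nonneg (l : List Int) : 0 ≤ l.foldl max 0 := pvM0_init_le l 0

theorem pvMem_le_M0 (l : List Int) : ∀ a x, x ∈ l → x ≤ l.foldl max a := by
  induction l with
  | nil => intro a x h; simp at h
  | cons y l ih =>
    intro a x h
    rw [List.foldl_cons]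
    rcases List.mem_cons.1 h with rfl | h
    · exact le_trans (le_max_right a x) (pvM0_init_le l _)
    · exact ih _ x h

theorem pvM0_perm {l l' : List Int} (h : l.Perm l') : ∀ a, l.foldl max a = l'.foldl max a := by
  induction h with
  | nil => intro a; rfl
  | cons x _ ih => intro a; rw [List.foldl_cons, List.foldl_cons, ih]
  | swap x y l => intro a; rw [List.foldl_cons, List.foldl_cons, List.foldl_cons, List.foldl_cons,
      max_assoc, max_comm y x, ← max_assoc]
  | trans _ _ ih1 ih2 => intro a; rw [ih1, ih2]

-- foldr of the DFS combine = shifted foldl max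
theorem pvFoldr_shift (d : Int) (xs : List Int) :
    ∀ best : Int, xs.foldr (fun x m => max m (d + x)) (max best d)
      = max best (d + xs.foldl max 0) := by
  induction xs with
  | nil => intro best; simp
  | cons x xs ih =>
    intro best
    rw [List.foldr_cons, ih, pvM0_cons]
    have h1 : d + max x (xs.foldl max 0) = max (d + x) (d + xs.foldl max 0) := by omega
    omega

-- ---------- top-two fold: first component and the exclusion property ----------
theorem pvTT_fst (xs : List Int) : ∀ ab : Int × Int,
    (xs.foldl pvStep ab).1 = xs.foldl max ab.1 := by
  induction xs with
  | nil => intro ab; rfl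
  | cons x xs ih =>
    intro ab
    rw [List.foldl_cons, List.foldl_cons, ih]
    congr 1
    rw [pvStep]
    split_ifs with h1 h2 <;> simp <;> omega

theorem pvEraseIdx_append_len (xs : List Int) (x : Int) :
    (xs ++ [x]).eraseIdx xs.length = xs := by
  induction xs with
  | nil => rfl
  | cons y ys ih => simp [List.eraseIdx, ih]

theorem pvTT_spec (xs : List Int) :
    (xs.foldl pvStep ((0 : Int), (0 : Int))).2 ≤ (xs.foldl pvStep ((0 : Int), (0 : Int))).1
    ∧ (xs.foldl pvStep ((0 : Int), (0 : Int))).1 = xs.foldl max 0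
    ∧ ∀ k (hk : k < xs.length),
        (if xs[k] = (xs.foldl pvStep ((0 : Int), (0 : Int))).1
         then (xs.foldl pvStep ((0 : Int), (0 : Int))).2
         else (xs.foldl pvStep ((0 : Int), (0 : Int))).1)
          = (xs.eraseIdx k).foldl max 0 := by
  induction xs using List.reverseRecOn with
  | nil => refine ⟨le_refl _, rfl, ?_⟩; intro k hk; simp at hk
  | append_singleton xs x ih =>
    obtain ⟨hba, hfst, herase⟩ := ih
    have hTT : (xs ++ [x]).foldl pvStep ((0 : Int), (0 : Int))
        = pvStep (xs.foldl pvStep ((0 : Int), (0 : Int))) x := by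
      rw [List.foldl_append]; rfl
    set A := (xs.foldl pvStep ((0 : Int), (0 : Int))).1 with hA
    set B := (xs.foldl pvStep ((0 : Int), (0 : Int))).2 with hB
    have hM0app : (xs ++ [x]).foldl max 0 = max (xs.foldl max 0) x := by
      rw [List.foldl_append]; rfl
    have hstep : pvStep (A, B) x = if x ≥ A then (x, A) else if x ≥ B then (A, x) else (A, B) := rfl
    have hABpair : (xs.foldl pvStep ((0 : Int), (0 : Int))) = (A, B) := rfl
    rw [hABpair] at hTT
    -- element bound: every xs[k] ≤ A
    have hel : ∀ k (hk : k < xs.length), xs[k] ≤ A := by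
      intro k hk
      rw [hfst]
      exact pvMem_le_M0 xs 0 _ (List.getElem_mem hk)
    have hEle : ∀ k (hk : k < xs.length), (xs.eraseIdx k).foldl max 0 ≤ A := by
      intro k hk
      have := herase k hk
      by_cases h : xs[k] = A
      · rw [if_pos h] at this; omega
      · rw [if_neg h] at this; omega
    refine ⟨?_, ?_, ?_⟩
    · rw [hTT, hstep]; split_ifs with h1 h2 <;> simp <;> omega
    · rw [hTT, hstep, hM0app, ← hfst]
      split_ifs with h1 h2 <;> simp <;> omega
    · intro k hk
      rw [List.length_append, List.length_singleton] at hk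
      by_cases hklt : k < xs.length
      · have hget : (xs ++ [x])[k]'(by simpa using hk) = xs[k] := List.getElem_append_left hklt
        have hera : (xs ++ [x]).eraseIdx k = xs.eraseIdx k ++ [x] :=
          List.eraseIdx_append_of_lt_length hklt [x]
        have hEfold : ((xs ++ [x]).eraseIdx k).foldl max 0
            = max ((xs.eraseIdx k).foldl max 0) x := by
          rw [hera, List.foldl_append]; rfl
        have hE := herase k hklt
        have hxk := hel k hklt
        have hEA := hEle k hklt
        rw [hget, hTT, hstep, hEfold]
        by_cases hxA : xs[k] = A
        · rw [if_pos hxA] at hE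
          split_ifs with h1 h2 h3 h4 h5 <;> simp at * <;> omega
        · rw [if_neg hxA] at hE
          split_ifs with h1 h2 h3 h4 h5 <;> simp at * <;> omega
      · have hkeq : k = xs.length := by omega
        subst hkeq
        have hget : (xs ++ [x])[xs.length]'(by simpa using hk) = x := by
          simp
        have hera : (xs ++ [x]).eraseIdx xs.length = xs := pvEraseIdx_append_len xs x
        rw [hget, hTT, hstep, hera, ← hfst]
        split_ifs with h1 h2 h3 h4 h5 <;> simp at * <;> omega

-- ---------- abbreviations used by the spec-level argument ----------
def pvW (weights : List Int) (j : Int) : Int := (PySem.List.pyGet? weights j).getD 0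

def pvDn (weights : List Int) (t : pvRTree) : Int := (pvDV weights t).1

def pvXs (weights : List Int) (ts : pvForest) : List Int :=
  (pvToList ts).map (fun c => pvDn weights c + pvW weights (pvRoot c))

theorem pvDVF_fold (weights : List Int) :
    ∀ (ts : pvForest) (ab : Int × Int), pvDVF weights ts ab = (pvXs weights ts).foldl pvStep ab := by
  intro ts
  cases ts with
  | nil => intro ab; rw [pvDVF]; rfl
  | cons c cs =>
    intro ab
    rw [pvDVF, pvDVF_fold weights cs]
    rfl

theorem pvDn_node (weights : List Int) (u : Int) (ts : pvForest) :
    pvDn weights (.node u ts) = (pvXs weights ts).foldl max 0 := by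
  rw [pvDn, pvDV, pvDVF_fold, pvTT_fst]

theorem pvDn_nonneg (weights : List Int) (t : pvRTree) : 0 ≤ pvDn weights t := by
  cases t with
  | node u ts => rw [pvDn_node]; exact pvM0_nonneg _

-- ---------- build: fuel monotonicity, members, assembling ----------
theorem pvBuild_mono (dct : List (Int × List Int)) :
    ∀ f, (∀ i fa t, pvBuildT dct f i fa = some t → pvBuildT dct (f + 1) i fa = some t)
       ∧ (∀ js i ts, pvBuildF dct f js i = some ts → pvBuildF dct (f + 1) js i = some ts) := by
  intro f
  induction f with
  | zero =>
    constructor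
    · intro i fa t h; rw [pvBuildT] at h; exact absurd h (by simp)
    · intro js i ts h
      cases js with
      | nil => rw [pvBuildF] at h ⊢; exact h
      | cons j js => rw [pvBuildF] at h; exact absurd h (by simp)
  | succ f ih =>
    have hT : ∀ i fa t, pvBuildT dct (f + 1) i fa = some t →
        pvBuildT dct (f + 2) i fa = some t := by
      intro i fa t h
      rw [pvBuildT] at h ⊢
      cases hg : (PySem.Dict.mk dct).get? i with
      | none => rw [hg] at h; simp at h
      | some adj =>
        rw [hg] at h
        dsimp only at h ⊢
        cases hb : pvBuildF dct f (adj.filter (· ≠ fa)) i with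
        | none => rw [hb] at h; simp at h
        | some ts => rw [ih.2 _ _ _ hb]; rw [hb] at h; exact h
    refine ⟨hT, ?_⟩
    intro js i ts h
    cases js with
    | nil => rw [pvBuildF] at h ⊢; exact h
    | cons j js =>
      rw [pvBuildF] at h ⊢
      cases ht : pvBuildT dct f j i with
      | none => rw [ht] at h; simp at h
      | some t =>
        cases hf : pvBuildF dct f js i with
        | none => rw [ht, hf] at h; simp at h
        | some ts' =>
          rw [ht, hf] at h
          rw [ih.1 _ _ _ ht, ih.2 _ _ _ hf]
          exact h

theorem pvBuildT_le (dct : List (Int × List Int)) {f f' : Nat} (hle : f ≤ f') (i fa : Int)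
    (t : pvRTree) (h : pvBuildT dct f i fa = some t) : pvBuildT dct f' i fa = some t := by
  induction f', hle using Nat.le_induction with
  | base => exact h
  | succ n hn ih => exact (pvBuild_mono dct n).1 _ _ _ ih

theorem pvBuildF_le (dct : List (Int × List Int)) {f f' : Nat} (hle : f ≤ f') (js : List Int)
    (i : Int) (ts : pvForest) (h : pvBuildF dct f js i = some ts) :
    pvBuildF dct f' js i = some ts := by
  induction f', hle using Nat.le_induction with
  | base => exact h
  | succ n hn ih => exact (pvBuild_mono dct n).2 _ _ _ ih

theorem pvBuiltF_members (dct : List (Int × List Int)) (i : Int) :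
    ∀ ts : pvForest, pvBuiltF dct i ts → ∀ c ∈ pvToList ts, pvBuiltT dct (pvRoot c) i c := by
  intro ts
  cases ts with
  | nil => intro _ c hc; rw [pvToList] at hc; simp at hc
  | cons c0 cs =>
    intro h c hc
    obtain ⟨h1, h2⟩ := pvBuiltF_cons dct i c0 cs h
    rw [pvToList] at hc
    rcases List.mem_cons.1 hc with rfl | hc
    · exact h1
    · exact pvBuiltF_members dct i cs h2 c hc

def pvOfList : List pvRTree → pvForest
  | [] => .nil
  | c :: cs => .cons c (pvOfList cs)

@[simp] theorem pvToList_ofList : ∀ L : List pvRTree, pvToList (pvOfList L) = L := by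
  intro L
  induction L with
  | nil => rw [pvOfList, pvToList]
  | cons c cs ih => rw [pvOfList, pvToList, ih]

theorem pvBuildF_of_list (dct : List (Int × List Int)) (u : Int) :
    ∀ L : List pvRTree, (∀ c ∈ L, pvBuiltT dct (pvRoot c) u c) →
      ∃ f, pvBuildF dct f (L.map pvRoot) u = some (pvOfList L) := by
  intro L
  induction L with
  | nil => exact fun _ => ⟨1, by rw [List.map_nil, pvBuildF, pvOfList]⟩
  | cons c cs ih =>
    intro h
    obtain ⟨f1, h1⟩ := h c List.mem_cons_self
    obtain ⟨f2, h2⟩ := ih (fun c' hc' => h c' (List.mem_cons_of_mem _ hc'))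
    refine ⟨max f1 f2 + 1, ?_⟩
    rw [List.map_cons, pvBuildF]
    rw [pvBuildT_le dct (by omega) _ _ _ h1, pvBuildF_le dct (by omega) _ _ _ h2]
    rw [pvOfList]

theorem pvBuiltT_node_of (dct : List (Int × List Int)) (u pa : Int) (adj : List Int)
    (L : List pvRTree)
    (hg : (PySem.Dict.mk dct).get? u = some adj)
    (hfilt : adj.filter (· ≠ pa) = L.map pvRoot)
    (hL : ∀ c ∈ L, pvBuiltT dct (pvRoot c) u c) :
    pvBuiltT dct u pa (.node u (pvOfList L)) := by
  obtain ⟨f, hf⟩ := pvBuildF_of_list dct u L hL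
  refine ⟨f + 1, ?_⟩
  rw [pvBuildT, hg]
  dsimp only
  rw [hfilt, hf]
  rfl

-- ---------- list utilities ----------
theorem pvFilter_ne_of_forall {l : List Int} {a : Int} (h : ∀ v ∈ l, v ≠ a) :
    l.filter (· ≠ a) = l :=
  List.filter_eq_self.2 (fun v hv => by simpa using h v hv)

theorem pvErase_eq_filter {a : Int} : ∀ {l : List Int}, l.count a = 1 →
    l.filter (· ≠ a) = l.erase a := by
  intro l
  induction l with
  | nil => intro _; rfl
  | cons b l ih =>
    intro hc
    rw [List.count_cons] at hc
    by_cases hb : b = a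
    · subst hb
      have hcount : l.count b = 0 := by simpa using hc
      have hnot : b ∉ l := List.count_eq_zero.1 hcount
      rw [List.erase_cons_head, List.filter_cons, if_neg (by simp)]
      exact pvFilter_ne_of_forall (fun v hv hva => hnot (hva ▸ hv))
    · rw [List.erase_cons_tail (by simpa using hb), List.filter_cons,
        if_pos (by simpa using hb)]
      rw [ih (by simpa [hb] using hc)]

theorem pvCount_one_perm {l : List Int} {a : Int} {r : List Int}
    (hc : l.count a = 1) (hf : l.filter (· ≠ a) = r) : l.Perm (a :: r) := by
  have ha : a ∈ l := List.count_pos_iff.1 (by omega)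
  have := List.perm_cons_erase ha
  rwa [← pvErase_eq_filter hc, hf] at this

theorem pvNodup_filter_eraseIdx : ∀ {l : List Int}, l.Nodup → ∀ k (hk : k < l.length),
    l.filter (· ≠ l[k]) = l.eraseIdx k := by
  intro l
  induction l with
  | nil => intro _ k hk; simp at hk
  | cons b l ih =>
    intro hnd k hk
    have hb : b ∉ l := (List.nodup_cons.1 hnd).1
    cases k with
    | zero =>
      simp only [List.getElem_cons_zero, List.eraseIdx_zero, List.filter_cons, List.tail_cons]
      rw [if_neg (by simp)]
      exact pvFilter_ne_of_forall (fun v hv hvb => hb (hvb ▸ hv))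
    | succ k =>
      have hk' : k < l.length := by simpa using hk
      have hbl : b ≠ l[k] := fun h => hb (h ▸ List.getElem_mem hk')
      simp only [List.getElem_cons_succ, List.eraseIdx_cons_succ, List.filter_cons]
      rw [if_pos (by simpa using hbl)]
      exact congrArg (List.cons b) (ih (List.nodup_cons.1 hnd).2 k hk')

theorem pvMap_eraseIdx {α β : Type} (f : α → β) :
    ∀ (l : List α) (k : Nat), (l.eraseIdx k).map f = (l.map f).eraseIdx k := by
  intro l
  induction l with
  | nil => intro k; rfl
  | cons a l ih =>
    intro k
    cases k with
    | zero => rfl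
    | succ k => simp only [List.eraseIdx_cons_succ, List.map_cons, ih]

theorem pvSum_eraseIdx : ∀ (l : List Nat) (k : Nat) (hk : k < l.length),
    (l.eraseIdx k).sum + l[k]'hk = l.sum := by
  intro l
  induction l with
  | nil => intro k hk; simp at hk
  | cons a l ih =>
    intro k hk
    cases k with
    | zero => simp [Nat.add_comm]
    | succ k =>
      have hk' : k < l.length := by simpa using hk
      simp only [List.eraseIdx_cons_succ, List.getElem_cons_succ, List.sum_cons]
      have := ih k hk'
      omega

theorem pvSubperm_nodup {l1 l2 : List Int} (h : l1.Subperm l2) (h2 : l2.Nodup) : l1.Nodup := by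
  obtain ⟨l, hperm, hsub⟩ := h
  exact (hperm.nodup_iff).1 (hsub.nodup h2)

theorem pvRootsF_subperm : ∀ ts : pvForest, (pvRootsF ts).Subperm (pvLabelsF ts) := by
  intro ts
  cases ts with
  | nil => simp [pvRootsF, pvToList]
  | cons c cs =>
    have hroots : pvRootsF (.cons c cs) = pvRoot c :: pvRootsF cs := by
      simp [pvRootsF, pvToList]
    rw [hroots]
    cases c with
    | node j k =>
      simp only [pvLabelsF_cons, pvLabelsT_node, pvRoot_node]
      rw [List.cons_append]
      refine (List.subperm_cons j).2 ?_
      exact (pvRootsF_subperm cs).trans (List.sublist_append_right _ _).subperm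

-- ---------- picking the subtree hanging at a given label ----------
def pvFindTree (C : List pvRTree) (j : Int) (dflt : pvRTree) : pvRTree :=
  (C.find? (fun c => pvRoot c == j)).getD dflt

theorem pvFindTree_mem {j : Int} (dflt : pvRTree) :
    ∀ {C : List pvRTree}, j ∈ C.map pvRoot →
      pvFindTree C j dflt ∈ C ∧ pvRoot (pvFindTree C j dflt) = j := by
  intro C
  induction C with
  | nil => intro h; simp at h
  | cons c C ih =>
    intro h
    by_cases hc : pvRoot c = j
    · rw [pvFindTree, List.find?_cons_of_pos (by simpa using hc), Option.getD_some]
      exact ⟨List.mem_cons_self, hc⟩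
    · have hj : j ∈ C.map pvRoot := by
        rcases (by simpa using h : j = pvRoot c ∨ ∃ a ∈ C, pvRoot a = j) with h1 | ⟨a, ha, hr⟩
        · exact absurd h1.symm hc
        · exact List.mem_map.2 ⟨a, ha, hr⟩
      have := ih hj
      rw [pvFindTree, List.find?_cons_of_neg (by simpa using hc)]
      exact ⟨List.mem_cons_of_mem _ this.1, this.2⟩

theorem pvFindTree_self (dflt : pvRTree) :
    ∀ {C : List pvRTree}, (C.map pvRoot).Nodup → ∀ c' ∈ C, pvFindTree C (pvRoot c') dflt = c' := by
  intro C
  induction C with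
  | nil => intro _ c' hc'; simp at hc'
  | cons c C ih =>
    intro hnd c' hc'
    rw [List.map_cons] at hnd
    have hnd2 := List.nodup_cons.1 hnd
    rcases List.mem_cons.1 hc' with rfl | hc'
    · rw [pvFindTree, List.find?_cons_of_pos (by simp), Option.getD_some]
    · have hne : pvRoot c ≠ pvRoot c' := by
        intro h
        exact hnd2.1 (h ▸ List.mem_map_of_mem hc')
      rw [pvFindTree, List.find?_cons_of_neg (by simpa using hne)]
      exact ih hnd2.2 c' hc'

-- ---------- membership of nested subtree entries ----------
theorem pvSubsT_sub_subsF : ∀ (ts : pvForest) (i : Int) (c : pvRTree), c ∈ pvToList ts →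
    ∀ e ∈ pvSubsT c i, e ∈ pvSubsF ts i := by
  intro ts
  cases ts with
  | nil => intro i c hc; rw [pvToList] at hc; simp at hc
  | cons t rest =>
    intro i c hc e he
    rw [pvToList] at hc
    rw [pvSubsF]
    rcases List.mem_cons.1 hc with rfl | hc
    · exact List.mem_append_left _ he
    · exact List.mem_append_right _ (pvSubsT_sub_subsF rest i c hc e he)

-- ---------- sizes ----------
theorem pvSizeF_toList (ts : pvForest) :
    pvSizeF ts = ((pvToList ts).map pvSizeT).sum := by
  cases ts with
  | nil => rw [pvSizeF, pvToList]; rfl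
  | cons c cs => rw [pvSizeF, pvToList, pvSizeF_toList cs]; simp

mutual
theorem pvSizeT_labels (t : pvRTree) : pvSizeT t = (pvLabelsT t).length := by
  cases t with
  | node i ts => rw [pvSizeT, pvLabelsT, List.length_cons, pvSizeF_labels ts]
theorem pvSizeF_labels (ts : pvForest) : pvSizeF ts = (pvLabelsF ts).length := by
  cases ts with
  | nil => rw [pvSizeF, pvLabelsF]; rfl
  | cons c cs =>
    rw [pvSizeF, pvLabelsF, List.length_append, pvSizeT_labels c, pvSizeF_labels cs]
end

-- ---------- B side: the DFS loop computes max best (d + pvDn) ----------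
theorem pvB_far_nil (nbr : List (List Int)) (weights : List Int) (f : Nat) (best : Int) :
    pvB_far nbr weights f [] best = best := by
  cases f <;> rfl

mutual
def pvFar2T (weights : List Int) : pvRTree → Int → Int → Int
  | .node u ts, d, best => pvFar2F weights ts u d (if d > best then d else best)
def pvFar2F (weights : List Int) : pvForest → Int → Int → Int → Int
  | .nil, _, _, best => best
  | .cons c cs, u, d, best =>
      pvFar2T weights c (d + pvW weights (pvRoot c)) (pvFar2F weights cs u d best)
end

def pvRevTasks3 (weights : List Int) (ts : pvForest) (i d : Int) : List (Int × Int × Int) :=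
  (pvRootsF ts).reverse.map (fun j => (j, i, d + pvW weights j))

-- running the DFS loop on the array nbr, along a tree built in the dictionary d2,
-- provided the array read at a key agrees with the dictionary (hread)
mutual
theorem pvRun3T (d2 : List (Int × List Int)) (nbr : List (List Int)) (weights : List Int)
    (hread : ∀ u adj, (PySem.Dict.mk d2).get? u = some adj →
      (PySem.List.pyGet? nbr u).getD [] = adj)
    (t : pvRTree) (fa d : Int)
    (hb : pvBuiltT d2 (pvRoot t) fa t)
    (f : Nat) (rest : List (Int × Int × Int)) (best : Int) :
    pvB_far nbr weights (pvSizeT t + f) ((pvRoot t, fa, d) :: rest) best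
      = pvB_far nbr weights f rest (pvFar2T weights t d best) := by
  cases t with
  | node u ts =>
    obtain ⟨⟨adj, hg, hfilter⟩, hbf⟩ := pvBuiltT_inv d2 u fa ts (by simpa [pvRoot] using hb)
    have hfuel : pvSizeT (.node u ts) + f = pvSizeF ts + f + 1 := by
      rw [pvSizeT]; ring
    rw [hfuel]
    show pvB_far nbr weights (pvSizeF ts + f + 1) ((u, fa, d) :: rest) best = _
    rw [pvB_far]
    rw [hread u adj hg]
    have hbody : (fun (s : List (Int × Int × Int)) (v : Int) =>
        if v ≠ fa then (v, u, d + ((PySem.List.pyGet? weights v).getD 0)) :: s else s)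
        = (fun s v => if v ≠ fa then (v, u, d + pvW weights v) :: s else s) := rfl
    rw [hbody, pvPushG_eq fa _ adj, hfilter]
    have : ((pvRootsF ts).reverse.map (fun j => (j, u, d + pvW weights j))) ++ rest
        = pvRevTasks3 weights ts u d ++ rest := rfl
    rw [this]
    rw [pvRun3F d2 nbr weights hread ts u d hbf]
    rfl
theorem pvRun3F (d2 : List (Int × List Int)) (nbr : List (List Int)) (weights : List Int)
    (hread : ∀ u adj, (PySem.Dict.mk d2).get? u = some adj →
      (PySem.List.pyGet? nbr u).getD [] = adj)
    (ts : pvForest) (i d : Int)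
    (hb : pvBuiltF d2 i ts)
    (f : Nat) (rest : List (Int × Int × Int)) (best : Int) :
    pvB_far nbr weights (pvSizeF ts + f) (pvRevTasks3 weights ts i d ++ rest) best
      = pvB_far nbr weights f rest (pvFar2F weights ts i d best) := by
  cases ts with
  | nil => simp [pvRevTasks3, pvRootsF, pvToList, pvSizeF, pvFar2F]
  | cons c cs =>
    obtain ⟨hbc, hbcs⟩ := pvBuiltF_cons d2 i c cs hb
    have hsplit : pvRevTasks3 weights (.cons c cs) i d ++ rest
        = pvRevTasks3 weights cs i d ++ ((pvRoot c, i, d + pvW weights (pvRoot c)) :: rest) := by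
      simp [pvRevTasks3, pvRootsF, pvToList]
    have hfuel : pvSizeF (.cons c cs) + f = pvSizeF cs + (pvSizeT c + f) := by
      rw [pvSizeF]; ring
    rw [hsplit, hfuel]
    rw [pvRun3F d2 nbr weights hread cs i d hbcs]
    rw [pvRun3T d2 nbr weights hread c i (d + pvW weights (pvRoot c)) hbc]
    rfl
end

mutual
theorem pvFar2T_val (weights : List Int) (t : pvRTree) (d best : Int) :
    pvFar2T weights t d best = max best (d + pvDn weights t) := by
  cases t with
  | node u ts =>
    rw [pvFar2T]
    have h1 : (if d > best then d else best) = max best d := by split_ifs <;> omega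
    rw [h1, pvFar2F_val weights ts u d, pvFoldr_shift, pvDn_node]
theorem pvFar2F_val (weights : List Int) (ts : pvForest) (u d : Int) :
    ∀ best : Int, pvFar2F weights ts u d best
      = (pvXs weights ts).foldr (fun x m => max m (d + x)) best := by
  cases ts with
  | nil => intro best; rw [pvFar2F]; rfl
  | cons c cs =>
    intro best
    rw [pvFar2F, pvFar2T_val weights c, pvFar2F_val weights cs u d best]
    have hxs : pvXs weights (.cons c cs)
        = (pvDn weights c + pvW weights (pvRoot c)) :: pvXs weights cs := by
      simp [pvXs, pvToList]
    rw [hxs, List.foldr_cons]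
    omega
end

-- ---------- the context carried down the tree by the rerooting argument ----------
def pvAdj (dct : List (Int × List Int)) (u : Int) : List Int :=
  ((PySem.Dict.mk dct).get? u).getD []

def pvVal (weights : List Int) (c : pvRTree) : Int :=
  pvDn weights c + pvW weights (pvRoot c)

theorem pvXs_eq (weights : List Int) (ts : pvForest) :
    pvXs weights ts = (pvToList ts).map (pvVal weights) := rfl

-- the goal: the whole tree rebuilt from this entry's node, with A's answer as its depth
def pvGoal (dct : List (Int × List Int)) (weights : List Int) (N : Nat)
    (e : pvRTree × Int × Int) : Prop :=
  ∃ T, pvBuiltT dct (pvRoot e.1) (-1) T ∧ pvSizeT T = N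
    ∧ pvDn weights T = max (pvDn weights e.1) e.2.2

def pvCtx (dct : List (Int × List Int)) (weights : List Int) (N : Nat)
    (t : pvRTree) (fa d : Int) : Prop :=
  pvBuiltT dct (pvRoot t) fa t ∧ (pvLabelsT t).Nodup ∧ (∀ x ∈ pvLabelsT t, 0 ≤ x)
  ∧ fa ∉ pvLabelsT t
  ∧ (∀ e ∈ pvSubsT t fa, (∀ v ∈ pvAdj dct (pvRoot e.1), 0 ≤ v)
        ∧ (e.2 ≠ -1 → (pvAdj dct (pvRoot e.1)).count e.2 = 1))
  ∧ ((fa = -1 ∧ d = 0 ∧ pvSizeT t = N)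
      ∨ (0 ≤ fa ∧ ∃ Rt, pvBuiltT dct fa (pvRoot t) Rt ∧ pvRoot Rt = fa
          ∧ d = pvW weights fa + pvDn weights Rt ∧ pvSizeT Rt + pvSizeT t = N))

theorem pvSubsU_roots (weights : List Int) (t : pvRTree) (fa d : Int) :
    (pvSubsU weights t fa d).map (fun e => pvRoot e.1) = pvLabelsT t := by
  have h1 : (pvSubsU weights t fa d).map (fun e => pvRoot e.1)
      = ((pvSubsU weights t fa d).map (fun e => (e.1, e.2.1))).map (fun p => pvRoot p.1) := by
    rw [List.map_map]; rfl
  rw [h1, pvSubsU_proj, pvSubs_roots_T]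

theorem pvLabels_member_sublist (ts : pvForest) (c : pvRTree) (hc : c ∈ pvToList ts) :
    (pvLabelsT c).Sublist (pvLabelsF ts) := by
  have := pvMem_subsF_of_toList ts 0 c hc
  exact pvSubs_labels_sublist_F ts 0 (c, 0) this

theorem pvSizeT_mem_le : ∀ (ts : pvForest) (c : pvRTree), c ∈ pvToList ts →
    pvSizeT c ≤ pvSizeF ts := by
  intro ts
  cases ts with
  | nil => intro c hc; rw [pvToList] at hc; simp at hc
  | cons t rest =>
    intro c hc
    rw [pvToList] at hc
    rw [pvSizeF]
    rcases List.mem_cons.1 hc with rfl | hc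
    · omega
    · have := pvSizeT_mem_le rest c hc
      omega

-- membership in the enriched forest decomposes into a child entry with its index
theorem pvSubsUF_decomp (weights : List Int) :
    ∀ (ts : pvForest) (ab : Int × Int) (u d : Int) (e : pvRTree × Int × Int),
    e ∈ pvSubsUF weights ts ab u d →
    ∃ k, ∃ hk : k < (pvToList ts).length,
      e ∈ pvSubsU weights ((pvToList ts)[k]) u
        ((if pvVal weights ((pvToList ts)[k]) = ab.1
          then (if d > ab.2 then d else ab.2) else (if d > ab.1 then d else ab.1))
          + pvW weights u) := by
  intro ts
  cases ts with
  | nil => intro ab u d e he; rw [pvSubsUF] at he; simp at he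
  | cons c cs =>
    intro ab u d e he
    rw [pvSubsUF] at he
    rcases List.mem_append.1 he with he | he
    · refine ⟨0, by simp [pvToList], ?_⟩
      simpa [pvToList, pvVal, pvDn, pvW] using he
    · obtain ⟨k, hk, he'⟩ := pvSubsUF_decomp weights cs ab u d e he
      exact ⟨k + 1, by simpa [pvToList] using hk, by simpa [pvToList] using he'⟩

-- generic assembly: build the tree hanging at u away from pa out of the trees for
-- the labels js = adj \ {pa}, and compute its depth and size
theorem pvBuildDn (dct : List (Int × List Int)) (weights : List Int) (u pa : Int)
    (adj js : List Int) (pad C : List pvRTree)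
    (hg : (PySem.Dict.mk dct).get? u = some adj)
    (hjs : adj.filter (· ≠ pa) = js)
    (hCb : ∀ c ∈ C, pvBuiltT dct (pvRoot c) u c)
    (hpadb : ∀ c ∈ pad, pvBuiltT dct (pvRoot c) u c)
    (hnd : ((pad ++ C).map pvRoot).Nodup)
    (hperm : js.Perm ((pad ++ C).map pvRoot)) :
    ∃ R, pvBuiltT dct u pa R ∧ pvRoot R = u
      ∧ pvSizeT R = 1 + ((pad ++ C).map pvSizeT).sum
      ∧ pvDn weights R = ((pad ++ C).map (pvVal weights)).foldl max 0 := by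
  set dflt : pvRTree := pvRTree.node u pvForest.nil with hdflt
  set σ : Int → pvRTree := fun j => pvFindTree (pad ++ C) j dflt with hσ
  have hmemall : ∀ j ∈ js, σ j ∈ pad ++ C ∧ pvRoot (σ j) = j := by
    intro j hj
    have : j ∈ (pad ++ C).map pvRoot := hperm.subset hj
    exact pvFindTree_mem dflt this
  set L : List pvRTree := js.map σ with hL
  have hLroots : L.map pvRoot = js := by
    rw [hL, List.map_map]
    apply List.map_congr_left ?_ |>.trans (List.map_id js)
    intro j hj
    exact (hmemall j hj).2
  have hLb : ∀ c ∈ L, pvBuiltT dct (pvRoot c) u c := by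
    intro c hc
    rw [hL] at hc
    obtain ⟨j, hj, rfl⟩ := List.mem_map.1 hc
    rcases List.mem_append.1 (hmemall j hj).1 with h | h
    · exact hpadb _ h
    · exact hCb _ h
  have hbuilt : pvBuiltT dct u pa (.node u (pvOfList L)) := by
    apply pvBuiltT_node_of dct u pa adj L hg
    · rw [hjs, hLroots]
    · exact hLb
  refine ⟨.node u (pvOfList L), hbuilt, by simp, ?_, ?_⟩
  · -- size
    rw [pvSizeT, pvSizeF_toList, pvToList_ofList]
    have h1 : L.map pvSizeT = js.map (fun j => pvSizeT (σ j)) := by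
      rw [hL, List.map_map]; rfl
    have h2 : (js.map (fun j => pvSizeT (σ j))).Perm
        (((pad ++ C).map pvRoot).map (fun j => pvSizeT (σ j))) := hperm.map _
    have h3 : ((pad ++ C).map pvRoot).map (fun j => pvSizeT (σ j)) = (pad ++ C).map pvSizeT := by
      rw [List.map_map]
      apply List.map_congr_left
      intro c hc
      simp only [Function.comp, hσ]
      rw [pvFindTree_self dflt hnd c hc]
    rw [h1, h2.sum_eq, h3]
    omega
  · -- depth
    rw [pvDn_node]
    have h1 : pvXs weights (pvOfList L) = js.map (fun j => pvVal weights (σ j)) := by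
      rw [pvXs, pvToList_ofList, hL, List.map_map]; rfl
    have h2 := (hperm.map (fun j => pvVal weights (σ j)))
    have h3 : ((pad ++ C).map pvRoot).map (fun j => pvVal weights (σ j))
        = (pad ++ C).map (pvVal weights) := by
      rw [List.map_map]
      apply List.map_congr_left
      intro c hc
      simp only [Function.comp, hσ]
      rw [pvFindTree_self dflt hnd c hc]
    rw [h1, pvM0_perm h2 0, h3]

-- unpacking the context at a node: adjacency facts and the 'pad' holding the
-- rest-of-the-tree (empty at the root, the parent-side tree otherwise)
theorem pvCtx_node (dct : List (Int × List Int)) (weights : List Int) (N : Nat)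
    (u : Int) (ts : pvForest) (fa d : Int)
    (hctx : pvCtx dct weights N (.node u ts) fa d) :
    ∃ (adj : List Int) (pad : List pvRTree),
      (PySem.Dict.mk dct).get? u = some adj
      ∧ adj.filter (· ≠ fa) = pvRootsF ts
      ∧ pvBuiltF dct u ts
      ∧ (∀ v ∈ adj, 0 ≤ v)
      ∧ (pvRootsF ts).Nodup
      ∧ (∀ c ∈ pad, pvBuiltT dct (pvRoot c) u c)
      ∧ (pad.map pvRoot).Nodup
      ∧ (∀ j ∈ pad.map pvRoot, j ∉ pvRootsF ts)
      ∧ adj.Perm (pad.map pvRoot ++ pvRootsF ts)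
      ∧ (∀ ys : List Int, ((pad.map (pvVal weights)) ++ ys).foldl max 0
            = max d (ys.foldl max 0))
      ∧ (pad.map pvSizeT).sum + pvSizeT (.node u ts) = N := by
  obtain ⟨hb, hnd, hlab0, hfanot, h4, h5⟩ := hctx
  obtain ⟨⟨adj, hg, hfilter⟩, hbf⟩ := pvBuiltT_inv dct u fa ts (by simpa using hb)
  have hhead := h4 (.node u ts, fa) (by rw [pvSubsT]; exact List.mem_cons_self)
  have hadj_eq : pvAdj dct u = adj := by rw [pvAdj, hg]; rfl
  have hpos : ∀ v ∈ adj, 0 ≤ v := by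
    intro v hv
    have := hhead.1 v
    rw [pvRoot_node, hadj_eq] at this
    exact this hv
  have hndf : (pvLabelsF ts).Nodup := by
    rw [pvLabelsT_node] at hnd; exact (List.nodup_cons.1 hnd).2
  have hndroots : (pvRootsF ts).Nodup := pvSubperm_nodup (pvRootsF_subperm ts) hndf
  rcases h5 with ⟨hfa, hd0, hsz⟩ | ⟨hfa0, Rt, hRb, hRr, hdval, hRsz⟩
  · refine ⟨adj, [], hg, hfilter, hbf, hpos, hndroots, by simp, by simp, by simp, ?_, ?_, ?_⟩
    · have : adj = pvRootsF ts := by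
        rw [← hfilter]
        exact (pvFilter_ne_of_forall (fun v hv hveq => by
          have := hpos v hv; omega)).symm
      rw [this]; simp
    · intro ys
      simp only [List.map_nil, List.nil_append]
      rw [hd0]
      have := pvM0_nonneg ys
      omega
    · simpa using hsz
  · have hcount : adj.count fa = 1 := by
      have := hhead.2
      rw [pvRoot_node, hadj_eq] at this
      exact this (by omega)
    refine ⟨adj, [Rt], hg, hfilter, hbf, hpos, hndroots, ?_, by simp, ?_, ?_, ?_, ?_⟩
    · intro c hc
      rcases List.mem_singleton.1 hc with rfl
      rw [hRr]; exact hRb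
    · intro j hj
      rcases List.mem_singleton.1 (by simpa using hj) with rfl
      rw [hRr]
      intro hmem
      exact hfanot ((pvRootsF_subperm ts).subset hmem |> fun h => by
        rw [pvLabelsT_node]; exact List.mem_cons_of_mem _ h)
    · have := pvCount_one_perm hcount hfilter
      simpa [hRr] using this
    · intro ys
      have hval : pvVal weights Rt = d := by
        rw [pvVal, hRr, hdval]; omega
      simp only [List.map_cons, List.map_nil, List.cons_append, List.nil_append]
      rw [hval, pvM0_cons]
    · simp only [List.map_cons, List.map_nil, List.sum_cons, List.sum_nil]
      omega

theorem pvCtx_head (dct : List (Int × List Int)) (weights : List Int) (N : Nat)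
    (u : Int) (ts : pvForest) (fa d : Int)
    (hctx : pvCtx dct weights N (.node u ts) fa d) :
    pvGoal dct weights N (.node u ts, fa, d) := by
  obtain ⟨adj, pad, hg, hfilter, hbf, hpos, hndroots, hpadb, hpadnd, hpadnot, hperm, hval, hsz⟩ :=
    pvCtx_node dct weights N u ts fa d hctx
  have hCb := pvBuiltF_members dct u ts hbf
  have hroots_eq : (pvToList ts).map pvRoot = pvRootsF ts := rfl
  have hnd2 : ((pad ++ pvToList ts).map pvRoot).Nodup := by
    rw [List.map_append, hroots_eq, List.nodup_append]
    exact ⟨hpadnd, hndroots, fun a ha b hb hab => hpadnot a ha (hab ▸ hb)⟩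
  obtain ⟨R, hRb, hRr, hRsz, hRdn⟩ := pvBuildDn dct weights u (-1) adj adj pad (pvToList ts)
    hg (pvFilter_ne_of_forall (fun v hv hveq => by have := hpos v hv; omega))
    hCb hpadb hnd2 (by rw [List.map_append, hroots_eq]; exact hperm)
  refine ⟨R, by simpa using hRb, ?_, ?_⟩
  · show pvSizeT R = N
    rw [hRsz, List.map_append, List.sum_append]
    have hnodesz : pvSizeT (pvRTree.node u ts) = pvSizeF ts + 1 := by rw [pvSizeT]
    rw [pvSizeF_toList] at hnodesz
    rw [hnodesz] at hsz
    omega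
  · show pvDn weights R = max (pvDn weights (.node u ts)) d
    rw [hRdn, List.map_append, hval]
    rw [← pvXs_eq, ← pvDn_node weights u ts]
    omega

theorem pvCtx_step (dct : List (Int × List Int)) (weights : List Int) (N : Nat)
    (u : Int) (ts : pvForest) (fa d : Int)
    (hctx : pvCtx dct weights N (.node u ts) fa d)
    (k : Nat) (hk : k < (pvToList ts).length) :
    pvCtx dct weights N ((pvToList ts)[k]) u
      ((if pvVal weights ((pvToList ts)[k]) = (pvDVF weights ts (0, 0)).1
        then (if d > (pvDVF weights ts (0, 0)).2 then d else (pvDVF weights ts (0, 0)).2)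
        else (if d > (pvDVF weights ts (0, 0)).1 then d else (pvDVF weights ts (0, 0)).1))
        + pvW weights u) := by
  obtain ⟨adj, pad, hg, hfilter, hbf, hpos, hndroots, hpadb, hpadnd, hpadnot, hperm, hval, hsz⟩ :=
    pvCtx_node dct weights N u ts fa d hctx
  obtain ⟨hb, hnd, hlab0, hfanot, h4, h5⟩ := hctx
  have hCb := pvBuiltF_members dct u ts hbf
  have hroots_eq : (pvToList ts).map pvRoot = pvRootsF ts := rfl
  set c := (pvToList ts)[k] with hc
  have hcmem : c ∈ pvToList ts := List.getElem_mem hk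
  have hrk : k < (pvRootsF ts).length := by
    rw [← hroots_eq, List.length_map]; exact hk
  have hrootk : (pvRootsF ts)[k]'hrk = pvRoot c := by
    show ((pvToList ts).map pvRoot)[k]'(by simpa [pvRootsF] using hrk) = pvRoot c
    simp [hc]
  have hrcmem : pvRoot c ∈ pvRootsF ts := by
    rw [← hroots_eq]; exact List.mem_map_of_mem hcmem
  -- the label list of the parent-side tree for c
  have hjs : (pvRootsF ts).filter (· ≠ pvRoot c) = (pvRootsF ts).eraseIdx k := by
    have h := pvNodup_filter_eraseIdx hndroots k hrk
    simp only [hrootk] at h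
    exact h
  have herC : (pvRootsF ts).eraseIdx k = ((pvToList ts).eraseIdx k).map pvRoot := by
    rw [pvMap_eraseIdx, hroots_eq]
  set C' := (pvToList ts).eraseIdx k with hC'
  have hC'sub : C'.Sublist (pvToList ts) := List.eraseIdx_sublist _ k
  have hpermc : (adj.filter (· ≠ pvRoot c)).Perm (pad.map pvRoot ++ C'.map pvRoot) := by
    have h1 := hperm.filter (· ≠ pvRoot c)
    have h2 : (pad.map pvRoot ++ pvRootsF ts).filter (· ≠ pvRoot c)
        = pad.map pvRoot ++ C'.map pvRoot := by
      rw [List.filter_append]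
      congr 1
      · apply pvFilter_ne_of_forall
        intro j hj hjeq
        exact hpadnot j hj (hjeq ▸ hrcmem)
      · rw [hjs, herC]
    rw [← h2]
    exact h1
  have hpermc' : (adj.filter (· ≠ pvRoot c)).Perm ((pad ++ C').map pvRoot) := by
    rw [List.map_append]; exact hpermc
  have hnd2 : ((pad ++ C').map pvRoot).Nodup := by
    have hbig : ((pad ++ pvToList ts).map pvRoot).Nodup := by
      rw [List.map_append, hroots_eq, List.nodup_append]
      exact ⟨hpadnd, hndroots, fun a ha b hb hab => hpadnot a ha (hab ▸ hb)⟩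
    exact ((hC'sub.append_left pad).map pvRoot).nodup hbig
  obtain ⟨R, hRb, hRr, hRsz, hRdn⟩ := pvBuildDn dct weights u (pvRoot c) adj
    (adj.filter (· ≠ pvRoot c)) pad C' hg rfl
    (fun c' hc' => hCb c' (hC'sub.mem hc')) hpadb hnd2 hpermc'
  have hxslen : k < (pvXs weights ts).length := by
    rw [pvXs_eq, List.length_map]; exact hk
  have hxsk : (pvXs weights ts)[k]'hxslen = pvVal weights c := by
    simp [pvXs_eq, hc]
  obtain ⟨htt1, htt2, htt3⟩ := pvTT_spec (pvXs weights ts)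
  have hab : pvDVF weights ts (0, 0) = (pvXs weights ts).foldl pvStep (0, 0) :=
    pvDVF_fold weights ts (0, 0)
  have herase := htt3 k hxslen
  have herX : (pvXs weights ts).eraseIdx k = C'.map (pvVal weights) := by
    rw [pvXs_eq]
    exact (pvMap_eraseIdx _ _ _).symm
  -- the depth of the parent-side tree R
  have hRdn' : pvDn weights R = max d (((pvXs weights ts).eraseIdx k).foldl max 0) := by
    rw [hRdn, List.map_append, hval, herX]
  -- labels facts for the child
  have hndf : (pvLabelsF ts).Nodup := by
    rw [pvLabelsT_node] at hnd; exact (List.nodup_cons.1 hnd).2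
  have hcsub : (pvLabelsT c).Sublist (pvLabelsF ts) := pvLabels_member_sublist ts c hcmem
  have hunotF : u ∉ pvLabelsF ts := by
    rw [pvLabelsT_node] at hnd; exact (List.nodup_cons.1 hnd).1
  have hu0 : 0 ≤ u := hlab0 u (by simp)
  refine ⟨?_, hcsub.nodup hndf, ?_, ?_, ?_, Or.inr ⟨hu0, R, hRb, hRr, ?_, ?_⟩⟩
  · exact hCb c hcmem
  · intro x hx
    exact hlab0 x (by rw [pvLabelsT_node]; exact List.mem_cons_of_mem _ (hcsub.mem hx))
  · intro hmem
    exact hunotF (hcsub.mem hmem)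
  · intro e he
    exact h4 e (by
      rw [pvSubsT]
      exact List.mem_cons_of_mem _ (pvSubsT_sub_subsF ts u c hcmem e he))
  · -- the propagated value equals w u + depth of R
    rw [hRdn', hab, ← hxsk]
    have hba' : ((pvXs weights ts).foldl pvStep (0, 0)).2
        ≤ ((pvXs weights ts).foldl pvStep (0, 0)).1 := htt1
    split_ifs with h1 h2 h3 <;> omega
  · -- sizes
    rw [hRsz, List.map_append, List.sum_append]
    have hms : ((pvToList ts).map pvSizeT).eraseIdx k = C'.map pvSizeT := by
      rw [hC', pvMap_eraseIdx]
    have hmk : k < ((pvToList ts).map pvSizeT).length := by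
      rw [List.length_map]; exact hk
    have hsum := pvSum_eraseIdx ((pvToList ts).map pvSizeT) k hmk
    rw [hms] at hsum
    have hgk : ((pvToList ts).map pvSizeT)[k]'hmk = pvSizeT c := by simp [hc]
    rw [hgk] at hsum
    have hnodesz : pvSizeT (pvRTree.node u ts) = pvSizeF ts + 1 := by rw [pvSizeT]
    rw [pvSizeF_toList] at hnodesz
    omega

theorem pvC2_aux (dct : List (Int × List Int)) (weights : List Int) (N : Nat) :
    ∀ (n : Nat) (t : pvRTree), pvSizeT t ≤ n → ∀ (fa d : Int), pvCtx dct weights N t fa d →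
    ∀ e ∈ pvSubsU weights t fa d, pvGoal dct weights N e := by
  intro n
  induction n with
  | zero =>
    intro t ht
    exfalso
    cases t with
    | node u ts =>
      have : pvSizeT (pvRTree.node u ts) = pvSizeF ts + 1 := by rw [pvSizeT]
      omega
  | succ n ih =>
    intro t ht fa d hctx e he
    cases t with
    | node u ts =>
      rw [pvSubsU] at he
      rcases List.mem_cons.1 he with rfl | he
      · exact pvCtx_head dct weights N u ts fa d hctx
      · obtain ⟨k, hk, he'⟩ := pvSubsUF_decomp weights ts (pvDVF weights ts (0, 0)) u d e he
        have hstep := pvCtx_step dct weights N u ts fa d hctx k hk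
        have hsz : pvSizeT ((pvToList ts)[k]) ≤ n := by
          have h1 := pvSizeT_mem_le ts _ (List.getElem_mem hk)
          have h2 : pvSizeT (pvRTree.node u ts) = pvSizeF ts + 1 := by rw [pvSizeT]
          omega
        exact ih ((pvToList ts)[k]) hsz u _ hstep e he'

theorem pvC2 (dct : List (Int × List Int)) (weights : List Int) (N : Nat) (t : pvRTree)
    (fa d : Int) (hctx : pvCtx dct weights N t fa d) :
    ∀ e ∈ pvSubsU weights t fa d, pvGoal dct weights N e :=
  pvC2_aux dct weights N (pvSizeT t) t (le_refl _) fa d hctx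

-- ---------- the discovery loop of B: writes and characterization ----------
theorem pvAppendAt_eq (nbr : List (List Int)) (i : Int) (x : Int) (h0 : 0 ≤ i)
    (h : i.toNat < nbr.length) :
    pvAppendAt nbr i x = nbr.set i.toNat ((nbr[i.toNat]'h) ++ [x]) := by
  obtain ⟨m, rfl⟩ : ∃ m : Nat, i = (m : Int) := ⟨i.toNat, (Int.toNat_of_nonneg h0).symm⟩
  simp only [Int.toNat_natCast] at h ⊢
  rw [pvAppendAt, PySem.List.pyGet?_natCast, List.getElem?_eq_getElem h]
  dsimp only
  rw [PySem.List.pySetD_natCast]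

def pvWriteV (u fa : Int) (adj : List Int) (nbr : List (List Int)) : List (List Int) :=
  adj.foldl (fun nbr v => if v ≠ fa then pvAppendAt (pvAppendAt nbr u v) v u else nbr) nbr

theorem pvWriteList_spec (u : Int) :
    ∀ (js : List Int) (nbr : List (List Int)),
    0 ≤ u → u.toNat < nbr.length →
    (∀ v ∈ js, 0 ≤ v ∧ v.toNat < nbr.length ∧ v ≠ u) → js.Nodup →
    (js.foldl (fun nbr v => pvAppendAt (pvAppendAt nbr u v) v u) nbr).length = nbr.length
    ∧ (js.foldl (fun nbr v => pvAppendAt (pvAppendAt nbr u v) v u) nbr)[u.toNat]?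
        = (nbr[u.toNat]?).map (· ++ js)
    ∧ (∀ v ∈ js, (js.foldl (fun nbr v => pvAppendAt (pvAppendAt nbr u v) v u) nbr)[v.toNat]?
        = (nbr[v.toNat]?).map (· ++ [u]))
    ∧ (∀ k : Nat, k ≠ u.toNat → (∀ v ∈ js, v.toNat ≠ k) →
        (js.foldl (fun nbr v => pvAppendAt (pvAppendAt nbr u v) v u) nbr)[k]? = nbr[k]?) := by
  intro js
  induction js with
  | nil =>
    intro nbr hu0 hul _ _
    refine ⟨rfl, by simp, by simp, fun k _ _ => rfl⟩
  | cons v js ih =>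
    intro nbr hu0 hul hjs hnd
    obtain ⟨hv0, hvl, hvu⟩ := hjs v List.mem_cons_self
    set nbr1 := pvAppendAt nbr u v with hnbr1
    have h1eq : nbr1 = nbr.set u.toNat ((nbr[u.toNat]'hul) ++ [v]) :=
      pvAppendAt_eq nbr u v hu0 hul
    have h1len : nbr1.length = nbr.length := by rw [h1eq]; simp
    set nbr2 := pvAppendAt nbr1 v u with hnbr2
    have h2eq : nbr2 = nbr1.set v.toNat ((nbr1[v.toNat]'(by omega)) ++ [u]) :=
      pvAppendAt_eq nbr1 v u hv0 (by omega)
    have h2len : nbr2.length = nbr.length := by rw [h2eq]; simp [h1len]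
    have h2u : nbr2[u.toNat]? = (nbr[u.toNat]?).map (· ++ [v]) := by
      rw [h2eq, List.getElem?_set_ne (by omega), h1eq, List.getElem?_set_self (by omega)]
      rw [List.getElem?_eq_getElem hul]
      rfl
    have hv1q : nbr1[v.toNat]? = nbr[v.toNat]? := by
      rw [h1eq]; exact List.getElem?_set_ne (by omega)
    have h2v : nbr2[v.toNat]? = (nbr[v.toNat]?).map (· ++ [u]) := by
      rw [h2eq, List.getElem?_set_self (by omega)]
      have hv1 : nbr1[v.toNat]'(by omega) = nbr[v.toNat]'hvl := by
        have h3 := List.getElem?_eq_getElem (l := nbr1) (by omega : v.toNat < nbr1.length)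
        rw [hv1q, List.getElem?_eq_getElem hvl] at h3
        exact (Option.some.inj h3).symm
      rw [hv1, List.getElem?_eq_getElem hvl]
      rfl
    have h2k : ∀ k : Nat, k ≠ u.toNat → k ≠ v.toNat → nbr2[k]? = nbr[k]? := by
      intro k hku hkv
      rw [h2eq, List.getElem?_set_ne (by omega), h1eq, List.getElem?_set_ne (by omega)]
    have hjs' : ∀ w ∈ js, 0 ≤ w ∧ w.toNat < nbr2.length ∧ w ≠ u := by
      intro w hw
      have := hjs w (List.mem_cons_of_mem _ hw)
      refine ⟨this.1, by omega, this.2.2⟩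
    obtain ⟨ihlen, ihu, ihv, ihk⟩ := ih nbr2 hu0 (by omega) hjs' (List.nodup_cons.1 hnd).2
    have hvnotjs : v ∉ js := (List.nodup_cons.1 hnd).1
    rw [List.foldl_cons]
    refine ⟨by rw [← hnbr2]; rw [ihlen, h2len], ?_, ?_, ?_⟩
    · rw [← hnbr2, ihu, h2u]
      cases nbr[u.toNat]? with
      | none => rfl
      | some l => simp
    · intro w hw
      rcases List.mem_cons.1 hw with rfl | hw
      · rw [← hnbr2, ihk w.toNat (by omega) ?_, h2v]
        intro w' hw'
        have hww := hjs w' (List.mem_cons_of_mem _ hw')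
        intro hww'
        have : w' = w := by omega
        exact hvnotjs (this ▸ hw')
      · have hwf := hjs w (List.mem_cons_of_mem _ hw)
        have hwv : w.toNat ≠ v.toNat := by
          intro h
          have : w = v := by omega
          exact hvnotjs (this ▸ hw)
        rw [← hnbr2, ihv w hw, h2k w.toNat (by omega) hwv]
    · intro k hku hkv
      have hkvt : k ≠ v.toNat := fun h => hkv v List.mem_cons_self (h.symm)
      rw [← hnbr2, ihk k hku (fun w hw => hkv w (List.mem_cons_of_mem _ hw)),
        h2k k hku hkvt]

-- the per-pop appends of the discovery loop, applied tree-structurally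
mutual
def pvDiscT (dct : List (Int × List Int)) : pvRTree → Int → List (List Int) → List (List Int)
  | .node u ts, fa, nbr => pvDiscF dct ts u (pvWriteV u fa (pvAdj dct u) nbr)
def pvDiscF (dct : List (Int × List Int)) : pvForest → Int → List (List Int) → List (List Int)
  | .nil, _, nbr => nbr
  | .cons c cs, i, nbr => pvDiscT dct c i (pvDiscF dct cs i nbr)
end

theorem pvB_disc_nil (dct : List (Int × List Int)) (f : Nat) (nbr : List (List Int)) :
    pvB_disc dct f [] nbr = nbr := by
  cases f <;> rfl

theorem pvDiscFold (u fa : Int) (adj : List Int) :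
    ∀ (st : List (Int × Int)) (nbr : List (List Int)),
    adj.foldl (fun (p : List (Int × Int) × List (List Int)) v =>
        if v ≠ fa then ((v, u) :: p.1, pvAppendAt (pvAppendAt p.2 u v) v u) else p) (st, nbr)
      = ((adj.filter (· ≠ fa)).reverse.map (fun v => (v, u)) ++ st, pvWriteV u fa adj nbr) := by
  induction adj with
  | nil => intro st nbr; simp [pvWriteV]
  | cons a adj ih =>
    intro st nbr
    rw [List.foldl_cons, List.filter_cons]
    by_cases h : a = fa
    · rw [if_neg (by simp [h]), if_neg (by simp [h]), ih]
      have : pvWriteV u fa (a :: adj) nbr = pvWriteV u fa adj nbr := by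
        rw [pvWriteV, List.foldl_cons, if_neg (by simp [h])]
        rfl
      rw [this]
    · rw [if_pos h, if_pos (by simp [h]), ih]
      have : pvWriteV u fa (a :: adj) nbr
          = pvWriteV u fa adj (pvAppendAt (pvAppendAt nbr u a) a u) := by
        rw [pvWriteV, List.foldl_cons, if_pos (by simp [h])]
        rfl
      rw [this]
      simp

mutual
theorem pvDiscRunT (dct : List (Int × List Int)) (t : pvRTree) (fa : Int)
    (hb : pvBuiltT dct (pvRoot t) fa t)
    (f : Nat) (rest : List (Int × Int)) (nbr : List (List Int)) :
    pvB_disc dct (pvSizeT t + f) ((pvRoot t, fa) :: rest) nbr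
      = pvB_disc dct f rest (pvDiscT dct t fa nbr) := by
  cases t with
  | node u ts =>
    obtain ⟨⟨adj, hg, hfilter⟩, hbf⟩ := pvBuiltT_inv dct u fa ts (by simpa [pvRoot] using hb)
    have hfuel : pvSizeT (.node u ts) + f = pvSizeF ts + f + 1 := by
      rw [pvSizeT]; ring
    rw [hfuel]
    show pvB_disc dct (pvSizeF ts + f + 1) ((u, fa) :: rest) nbr = _
    rw [pvB_disc]
    simp only [hg, Option.getD_some]
    rw [pvDiscFold u fa adj rest nbr, hfilter]
    have hW : pvWriteV u fa adj nbr = pvWriteV u fa (pvAdj dct u) nbr := by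
      rw [pvAdj, hg]
      rfl
    have : ((pvRootsF ts).reverse.map (fun v => (v, u))) ++ rest = pvRevTasks ts u ++ rest := rfl
    dsimp only
    rw [this, pvDiscRunF dct ts u hbf, hW]
    rfl
theorem pvDiscRunF (dct : List (Int × List Int)) (ts : pvForest) (i : Int)
    (hb : pvBuiltF dct i ts)
    (f : Nat) (rest : List (Int × Int)) (nbr : List (List Int)) :
    pvB_disc dct (pvSizeF ts + f) (pvRevTasks ts i ++ rest) nbr
      = pvB_disc dct f rest (pvDiscF dct ts i nbr) := by
  cases ts with
  | nil => simp [pvRevTasks, pvRootsF, pvToList, pvSizeF, pvDiscF]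
  | cons c cs =>
    obtain ⟨hbc, hbcs⟩ := pvBuiltF_cons dct i c cs hb
    have hsplit : pvRevTasks (.cons c cs) i ++ rest
        = pvRevTasks cs i ++ ((pvRoot c, i) :: rest) := by
      simp [pvRevTasks, pvRootsF, pvToList]
    have hfuel : pvSizeF (.cons c cs) + f = pvSizeF cs + (pvSizeT c + f) := by
      rw [pvSizeF]; ring
    rw [hsplit, hfuel]
    rw [pvDiscRunF dct cs i hbcs]
    rw [pvDiscRunT dct c i hbc]
    rfl
end

theorem pvRoot_mem_labels (t : pvRTree) : pvRoot t ∈ pvLabelsT t := by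
  cases t with
  | node i ts => simp [pvRoot]

-- characterization of the written array over the tree
mutual
theorem pvDiscT_spec (dct : List (Int × List Int)) (t : pvRTree) (fa : Int)
    (nbr : List (List Int))
    (hb : pvBuiltT dct (pvRoot t) fa t)
    (hnd : (pvLabelsT t).Nodup)
    (hlab : ∀ x ∈ pvLabelsT t, 0 ≤ x ∧ x.toNat < nbr.length)
    (h0 : ∀ x ∈ pvLabelsT t, x ≠ pvRoot t → nbr[x.toNat]? = some []) :
    (pvDiscT dct t fa nbr).length = nbr.length
    ∧ (∀ k : Nat, ((k : Int) ∉ pvLabelsT t) → (pvDiscT dct t fa nbr)[k]? = nbr[k]?)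
    ∧ (∀ u ts, t = .node u ts →
        (pvDiscT dct t fa nbr)[u.toNat]? = (nbr[u.toNat]?).map (· ++ pvRootsF ts))
    ∧ (∀ p ∈ pvSubsT t fa, ∀ w cs, p.1 = pvRTree.node w cs → w ≠ pvRoot t →
        (pvDiscT dct t fa nbr)[w.toNat]? = some (p.2 :: pvRootsF cs)) := by
  cases t with
  | node u ts =>
    obtain ⟨⟨adj, hg, hfilter⟩, hbf⟩ := pvBuiltT_inv dct u fa ts (by simpa [pvRoot] using hb)
    have hu0 : 0 ≤ u ∧ u.toNat < nbr.length := hlab u (by simp)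
    have hndf : (pvLabelsF ts).Nodup := (List.nodup_cons.1 (by simpa using hnd)).2
    have hunotF : u ∉ pvLabelsF ts := (List.nodup_cons.1 (by simpa using hnd)).1
    have hndroots : (pvRootsF ts).Nodup := pvSubperm_nodup (pvRootsF_subperm ts) hndf
    have hrootsub : ∀ v ∈ pvRootsF ts, v ∈ pvLabelsF ts :=
      fun v hv => (pvRootsF_subperm ts).subset hv
    have hWred : pvWriteV u fa (pvAdj dct u) nbr
        = (pvRootsF ts).foldl (fun nbr v => pvAppendAt (pvAppendAt nbr u v) v u) nbr := by
      rw [pvWriteV, pvAdj, hg]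
      dsimp only [Option.getD_some]
      rw [pvFoldl_guard, hfilter]
    obtain ⟨hWlen, hWu, hWv, hWk⟩ := pvWriteList_spec u (pvRootsF ts) nbr hu0.1 hu0.2
      (fun v hv => by
        have h := hlab v (by simp [hrootsub v hv])
        refine ⟨h.1, h.2, ?_⟩
        intro hvu
        exact hunotF (hvu ▸ hrootsub v hv))
      hndroots
    set nbr1 := (pvRootsF ts).foldl (fun nbr v => pvAppendAt (pvAppendAt nbr u v) v u) nbr
      with hnbr1
    have h1len : nbr1.length = nbr.length := hWlen
    obtain ⟨hFlen, hFframe, hFval⟩ := pvDiscF_spec dct ts u nbr1 hbf hndf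
      (fun x hx => by
        have := hlab x (by simp [hx])
        exact ⟨this.1, by omega⟩)
      (fun x hx => by
        by_cases hxr : x ∈ pvRootsF ts
        · rw [if_pos hxr, hWv x hxr]
          have := h0 x (by simp [hx]) (by
            intro h
            have hxu : x = u := by simpa using h
            exact hunotF (hxu ▸ hx))
          rw [this]
          rfl
        · rw [if_neg hxr, hWk x.toNat ?_ ?_]
          · exact h0 x (by simp [hx]) (by
              intro h
              have hxu : x = u := by simpa using h
              exact hunotF (hxu ▸ hx))
          · have hx0 := hlab x (by simp [hx])
            intro h
            have : x = u := by omega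
            exact hunotF (this ▸ hx)
          · intro v hv hveq
            have hv0 := hlab v (by simp [hrootsub v hv])
            have hx0 := hlab x (by simp [hx])
            have : v = x := by omega
            exact hxr (this ▸ hv))
    have hresult : pvDiscT dct (.node u ts) fa nbr = pvDiscF dct ts u nbr1 := by
      rw [pvDiscT, hWred]
    have hufr : (pvDiscF dct ts u nbr1)[u.toNat]? = nbr1[u.toNat]? :=
      hFframe u.toNat (by
        rw [Int.toNat_of_nonneg hu0.1]
        exact hunotF)
    refine ⟨?_, ?_, ?_, ?_⟩
    · rw [hresult, hFlen, h1len]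
    · intro k hk
      rw [hresult, hFframe k (fun h => hk (by simp [h])), hWk k ?_ ?_]
      · intro h
        exact hk (by
          simp only [pvLabelsT_node, List.mem_cons]
          left
          omega)
      · intro v hv hveq
        have hv0 := hlab v (by simp [hrootsub v hv])
        apply hk
        simp only [pvLabelsT_node, List.mem_cons]
        right
        have : v = (k : Int) := by omega
        exact this ▸ hrootsub v hv
    · intro u' ts' heq
      injection heq with h1 h2
      subst h1; subst h2
      rw [hresult, hufr, hWu]
    · intro p hp w cs hpw hwne
      rw [pvSubsT] at hp
      rcases List.mem_cons.1 hp with rfl | hp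
      · exfalso
        apply hwne
        have h1 : pvRTree.node u ts = pvRTree.node w cs := hpw
        injection h1 with h1 _
        rw [pvRoot_node]
        exact h1.symm
      · rw [hresult]
        exact hFval p hp w cs hpw
theorem pvDiscF_spec (dct : List (Int × List Int)) (ts : pvForest) (i : Int)
    (nbr : List (List Int))
    (hb : pvBuiltF dct i ts)
    (hnd : (pvLabelsF ts).Nodup)
    (hlab : ∀ x ∈ pvLabelsF ts, 0 ≤ x ∧ x.toNat < nbr.length)
    (h0 : ∀ x ∈ pvLabelsF ts, nbr[x.toNat]? = some (if x ∈ pvRootsF ts then [i] else [])) :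
    (pvDiscF dct ts i nbr).length = nbr.length
    ∧ (∀ k : Nat, ((k : Int) ∉ pvLabelsF ts) → (pvDiscF dct ts i nbr)[k]? = nbr[k]?)
    ∧ (∀ p ∈ pvSubsF ts i, ∀ w cs, p.1 = pvRTree.node w cs →
        (pvDiscF dct ts i nbr)[w.toNat]? = some (p.2 :: pvRootsF cs)) := by
  cases ts with
  | nil =>
    refine ⟨rfl, fun k _ => rfl, ?_⟩
    intro p hp
    rw [pvSubsF] at hp
    simp at hp
  | cons c cs =>
    obtain ⟨hbc, hbcs⟩ := pvBuiltF_cons dct i c cs hb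
    have h3 : (pvLabelsT c).Nodup ∧ (pvLabelsF cs).Nodup ∧
        (∀ x ∈ pvLabelsT c, x ∉ pvLabelsF cs) := by
      simp only [pvLabelsF_cons] at hnd
      have h := List.nodup_append.1 hnd
      exact ⟨h.1, h.2.1, fun x hx hv => h.2.2 x hx x hv rfl⟩
    have hrootc_mem : pvRoot c ∈ pvLabelsT c := pvRoot_mem_labels c
    have hroots_cons : pvRootsF (.cons c cs) = pvRoot c :: pvRootsF cs := by
      simp [pvRootsF, pvToList]
    obtain ⟨hcslen, hcsframe, hcsval⟩ := pvDiscF_spec dct cs i nbr hbcs h3.2.1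
      (fun x hx => hlab x (by simp [hx]))
      (fun x hx => by
        have := h0 x (by simp [hx])
        rw [hroots_cons] at this
        by_cases hxr : x ∈ pvRootsF cs
        · rw [if_pos hxr]
          rw [if_pos (List.mem_cons_of_mem _ hxr)] at this
          exact this
        · rw [if_neg hxr]
          rw [if_neg ?_] at this
          · exact this
          · intro h
            rcases List.mem_cons.1 h with h | h
            · exact h3.2.2 x (h ▸ hrootc_mem) hx
            · exact hxr h)
    obtain ⟨hclen, hcframe, hcroot, hcval⟩ := pvDiscT_spec dct c i
      (pvDiscF dct cs i nbr) hbc h3.1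
      (fun x hx => by
        have := hlab x (by simp [hx])
        exact ⟨this.1, by omega⟩)
      (fun x hx hxr => by
        have hx0 := hlab x (by simp [hx])
        rw [hcsframe x.toNat (by
          rw [Int.toNat_of_nonneg hx0.1]
          exact fun h => h3.2.2 x hx h)]
        have := h0 x (by simp [hx])
        rw [hroots_cons] at this
        rw [if_neg ?_] at this
        · exact this
        · intro h
          rcases List.mem_cons.1 h with h | h
          · exact hxr (by
              have := pvBuiltT_root dct (pvRoot c) i c hbc
              exact h)
          · exact h3.2.2 x hx ((pvRootsF_subperm cs).subset h))
    have hresult : pvDiscF dct (.cons c cs) i nbr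
        = pvDiscT dct c i (pvDiscF dct cs i nbr) := by rw [pvDiscF]
    refine ⟨?_, ?_, ?_⟩
    · rw [hresult, hclen, hcslen]
    · intro k hk
      rw [hresult, hcframe k (fun h => hk (by simp [h])), hcsframe k (fun h => hk (by simp [h]))]
    · intro p hp w cs' hpw
      rw [pvSubsF] at hp
      rcases List.mem_append.1 hp with hp | hp
      · cases c with
        | node w0 cs0 =>
          rw [pvSubsT] at hp
          rcases List.mem_cons.1 hp with rfl | hp
          · -- the top child c itself: parent entry already in nbr, children appended
            have hpw' : pvRTree.node w0 cs0 = pvRTree.node w cs' := hpw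
            injection hpw' with h1 h2
            rw [hresult]
            show (pvDiscT dct (pvRTree.node w0 cs0) i (pvDiscF dct cs i nbr))[w.toNat]?
              = some (i :: pvRootsF cs')
            rw [← h1, ← h2]
            rw [hcroot w0 cs0 rfl]
            have hw0 := hlab w0 (by simp)
            rw [hcsframe w0.toNat (by
              rw [Int.toNat_of_nonneg hw0.1]
              exact fun h => h3.2.2 w0 (by simp) h)]
            have := h0 w0 (by simp)
            rw [hroots_cons, if_pos (by
              simp only [List.mem_cons]
              left
              rfl)] at this
            rw [this]
            rfl
          · -- deeper inside c
            have hwmem : w ∈ pvLabelsF cs0 := by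
              have := pvSubsF_root_mem cs0 w0 p hp
              rw [hpw] at this
              simpa using this
            have hw0not : w0 ∉ pvLabelsF cs0 :=
              (List.nodup_cons.1 (by simpa using h3.1)).1
            rw [hresult]
            exact hcval p (by rw [pvSubsT]; exact List.mem_cons_of_mem _ hp) w cs' hpw
              (by
                intro h
                simp only [pvRoot_node] at h
                exact hw0not (h ▸ hwmem))
      · -- inside cs
        have hwmemcs : w ∈ pvLabelsF cs := by
          have := pvSubsF_root_mem cs i p hp
          rw [hpw] at this
          simpa using this
        rw [hresult]
        have hw0 := hlab w (by simp [hwmemcs])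
        rw [hcframe w.toNat (by
          rw [Int.toNat_of_nonneg hw0.1]
          exact fun h => h3.2.2 w h hwmemcs)]
        exact hcsval p hp w cs' hpw
end

-- ---------- the derived dictionary over range n ----------
theorem pvGet?_mem_of_some : ∀ {l : List (Int × List Int)} {x : Int} {v : List Int},
    (PySem.Dict.mk l).get? x = some v → (x, v) ∈ l := by
  intro l
  induction l with
  | nil => intro x v h; simp [PySem.Dict.get?] at h
  | cons p rest ih =>
    intro x v h
    rw [PySem.Dict.get?_mk_cons] at h
    by_cases hx : p.1 = x
    · rw [if_pos (by simpa using hx)] at h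
      injection h with h
      have hpe : p = (x, v) := by
        obtain ⟨p1, p2⟩ := p
        simp only at hx h
        rw [hx, h]
      rw [hpe]
      exact List.mem_cons_self
    · rw [if_neg (by simpa using hx)] at h
      exact List.mem_cons_of_mem _ (ih h)

theorem pvGet?_append_left {l1 l2 : List (Int × List Int)} {x : Int} {v : List Int}
    (h : (PySem.Dict.mk l1).get? x = some v) :
    (PySem.Dict.mk (l1 ++ l2)).get? x = some v := by
  induction l1 with
  | nil => simp [PySem.Dict.get?] at h
  | cons p rest ih =>
    rw [PySem.Dict.get?_mk_cons] at h
    rw [List.cons_append, PySem.Dict.get?_mk_cons]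
    by_cases hx : (p.1 == x) = true
    · rw [if_pos hx] at h ⊢; exact h
    · rw [if_neg hx] at h ⊢; exact ih h

theorem pvGet?_append_right {l1 l2 : List (Int × List Int)} {x : Int}
    (h : ∀ p ∈ l1, p.1 ≠ x) :
    (PySem.Dict.mk (l1 ++ l2)).get? x = (PySem.Dict.mk l2).get? x := by
  induction l1 with
  | nil => rfl
  | cons p rest ih =>
    rw [List.cons_append, PySem.Dict.get?_mk_cons,
      if_neg (by simpa using h p List.mem_cons_self)]
    exact ih (fun q hq => h q (List.mem_cons_of_mem _ hq))

theorem pvGetRange (g : Nat → List Int) :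
    ∀ (n k : Nat), k < n →
    (PySem.Dict.mk ((List.range n).map (fun i : Nat => ((i : Int), g i)))).get? (k : Int)
      = some (g k) := by
  intro n
  induction n with
  | zero => intro k hk; omega
  | succ n ih =>
    intro k hk
    rw [List.range_succ, List.map_append]
    by_cases hkn : k < n
    · exact pvGet?_append_left (ih k hkn)
    · have hke : k = n := by omega
      subst hke
      rw [pvGet?_append_right (by
        intro p hp
        obtain ⟨i, hi, hpe⟩ := List.mem_map.1 hp
        rw [← hpe]
        have hik : i < k := List.mem_range.1 hi
        simp only
        intro h
        have : i = k := by exact_mod_cast h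
        omega)]
      simp [PySem.Dict.get?_mk_cons]

-- ---------- each non-head subtree entry has a parent entry ----------
mutual
theorem pvSubs_parentT (t : pvRTree) (fa : Int) :
    ∀ p ∈ pvSubsT t fa, p = (t, fa)
      ∨ ∃ q ∈ pvSubsT t fa, ∃ w cs, q.1 = pvRTree.node w cs ∧ p.2 = w ∧ p.1 ∈ pvToList cs := by
  cases t with
  | node u ts =>
    intro p hp
    rw [pvSubsT] at hp
    rcases List.mem_cons.1 hp with rfl | hp
    · exact Or.inl rfl
    · rcases pvSubs_parentF ts u p hp with ⟨hq2, hmem⟩ | ⟨q, hq, w, cs, hqn, hp2, hp1⟩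
      · refine Or.inr ⟨(.node u ts, fa), by rw [pvSubsT]; exact List.mem_cons_self,
          u, ts, rfl, hq2, hmem⟩
      · exact Or.inr ⟨q, by rw [pvSubsT]; exact List.mem_cons_of_mem _ hq, w, cs, hqn, hp2, hp1⟩
theorem pvSubs_parentF (ts : pvForest) (i : Int) :
    ∀ p ∈ pvSubsF ts i, (p.2 = i ∧ p.1 ∈ pvToList ts)
      ∨ ∃ q ∈ pvSubsF ts i, ∃ w cs, q.1 = pvRTree.node w cs ∧ p.2 = w ∧ p.1 ∈ pvToList cs := by
  cases ts with
  | nil => intro p hp; rw [pvSubsF] at hp; simp at hp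
  | cons c cs0 =>
    intro p hp
    rw [pvSubsF] at hp
    rcases List.mem_append.1 hp with hp | hp
    · rcases pvSubs_parentT c i p hp with rfl | ⟨q, hq, w, cs, hqn, hp2, hp1⟩
      · exact Or.inl ⟨rfl, by rw [pvToList]; exact List.mem_cons_self⟩
      · exact Or.inr ⟨q, by rw [pvSubsF]; exact List.mem_append_left _ hq,
          w, cs, hqn, hp2, hp1⟩
    · rcases pvSubs_parentF cs0 i p hp with ⟨hq2, hmem⟩ | ⟨q, hq, w, cs, hqn, hp2, hp1⟩
      · exact Or.inl ⟨hq2, by rw [pvToList]; exact List.mem_cons_of_mem _ hmem⟩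
      · exact Or.inr ⟨q, by rw [pvSubsF]; exact List.mem_append_right _ hq,
          w, cs, hqn, hp2, hp1⟩
end

theorem pvSubs_unique (t0 : pvRTree) (fa0 : Int) (hnd : (pvLabelsT t0).Nodup)
    (p q : pvRTree × Int) (hp : p ∈ pvSubsT t0 fa0) (hq : q ∈ pvSubsT t0 fa0)
    (h : pvRoot p.1 = pvRoot q.1) : p = q := by
  have hmapnd : ((pvSubsT t0 fa0).map (fun p => pvRoot p.1)).Nodup := by
    rw [pvSubs_roots_T]; exact hnd
  exact List.inj_on_of_nodup_map hmapnd hp hq h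

theorem pvOfList_toList : ∀ ts : pvForest, pvOfList (pvToList ts) = ts := by
  intro ts
  cases ts with
  | nil => rfl
  | cons c cs => rw [pvToList, pvOfList, pvOfList_toList cs]

def pvPad (fa : Int) : List Int := if fa = -1 then [] else [fa]

-- rebuilding the tree inside the derived dictionary
theorem pvBuilt2_aux (d2 : List (Int × List Int)) :
    ∀ (n : Nat) (t : pvRTree) (fa : Int), pvSizeT t ≤ n →
    (∀ p ∈ pvSubsT t fa, ∀ u ts, p.1 = pvRTree.node u ts →
      (PySem.Dict.mk d2).get? u = some (pvPad p.2 ++ pvRootsF ts)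
      ∧ (pvPad p.2 ++ pvRootsF ts).filter (· ≠ p.2) = pvRootsF ts) →
    pvBuiltT d2 (pvRoot t) fa t := by
  intro n
  induction n with
  | zero =>
    intro t fa ht
    exfalso
    cases t with
    | node u ts =>
      have : pvSizeT (pvRTree.node u ts) = pvSizeF ts + 1 := by rw [pvSizeT]
      omega
  | succ n ih =>
    intro t fa ht H
    cases t with
    | node u ts =>
      obtain ⟨hg, hfilt⟩ := H (.node u ts, fa) (by rw [pvSubsT]; exact List.mem_cons_self)
        u ts rfl
      have hmem : ∀ c ∈ pvToList ts, pvBuiltT d2 (pvRoot c) u c := by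
        intro c hc
        apply ih c u ?_ ?_
        · have h1 := pvSizeT_mem_le ts _ hc
          have h2 : pvSizeT (pvRTree.node u ts) = pvSizeF ts + 1 := by rw [pvSizeT]
          omega
        · intro p hp w cs hpw
          exact H p (by
            rw [pvSubsT]
            exact List.mem_cons_of_mem _ (pvSubsT_sub_subsF ts u c hc p hp)) w cs hpw
      have := pvBuiltT_node_of d2 u fa (pvPad fa ++ pvRootsF ts) (pvToList ts) hg
        (by rw [hfilt]; rfl) hmem
      rw [pvOfList_toList] at this
      simpa using this

-- ---------- final assembly ----------
theorem pvFinal (dct : List (Int × List Int)) (weights : List Int)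
    (hpre : Pre_get_tree_distance_max_weighted dct weights) :
    get_tree_distance_max_weighted dct weights
      = get_tree_distance_max_weighted_alt dct weights := by
  rw [Pre_get_tree_distance_max_weighted] at hpre
  set n := dct.length with hn
  cases hbuild : pvBuildT dct (2 * n + 2) 0 (-1) with
  | none => rw [hbuild] at hpre; simp at hpre
  | some t0 =>
  rw [hbuild] at hpre
  simp only [Bool.and_eq_true, Bool.or_eq_true, decide_eq_true_eq, List.all_eq_true] at hpre
  obtain ⟨⟨hnd, hrange⟩, hwlen⟩ := hpre
  have ht0 : pvBuiltT dct 0 (-1) t0 := ⟨2 * n + 2, hbuild⟩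
  have hroot0 : pvRoot t0 = 0 := pvBuildT_root_eq dct (2 * n + 2) 0 (-1) t0 hbuild
  have hrange' : ∀ u ∈ pvLabelsT t0, 0 ≤ u ∧ u < (n : Int) := by
    intro u hu
    have := hrange u hu
    exact ⟨this.1, this.2⟩
  have hlab0 : ∀ u ∈ pvLabelsT t0, 0 ≤ u := fun u hu => (hrange' u hu).1
  -- the tree has at most n nodes
  have hszle : pvSizeT t0 ≤ n := by
    have hsubF : (pvLabelsT t0).toFinset ⊆ Finset.Ico (0 : Int) (n : Int) := by
      intro x hx
      exact Finset.mem_Ico.2 (hrange' x (List.mem_toFinset.1 hx))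
    have hcard1 : (pvLabelsT t0).toFinset.card = (pvLabelsT t0).length :=
      List.toFinset_card_of_nodup hnd
    have hcard2 : (Finset.Ico (0 : Int) (n : Int)).card = n := by
      rw [Int.card_Ico]
      simp
    have := Finset.card_le_card hsubF
    rw [hcard1, hcard2] at this
    rw [pvSizeT_labels]
    omega
  set F := (n + 2) * (n + 2) with hF
  have hF1 : 2 * n + 2 ≤ F := by nlinarith
  have hbt0 : pvBuiltT dct (pvRoot t0) (-1) t0 := by rw [hroot0]; exact ht0
  -- ===== A side =====
  set sub0 := List.replicate n ((0 : Int), (0 : Int)) with hsub0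
  have hlab1 : ∀ u ∈ pvLabelsT t0, 0 ≤ u ∧ u.toNat < sub0.length := by
    intro u hu
    have := hrange' u hu
    refine ⟨this.1, ?_⟩
    rw [hsub0, List.length_replicate]
    omega
  have h0 : ∀ u ∈ pvLabelsT t0, PySem.List.pyGet? sub0 u = some ((0 : Int), (0 : Int)) := by
    intro u hu
    have h := hlab1 u hu
    rw [PySem.List.pyGet?_of_nonneg _ h.1, hsub0]
    rw [List.getElem?_replicate, if_pos (by simpa [hsub0] using h.2)]
  obtain ⟨hframe1, hsubvals⟩ := pvApplyT_spec dct weights t0 (-1) sub0 hbt0 hnd hlab1 h0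
  set subF := pvApplyT dct weights t0 (-1) sub0 with hsubF
  have hsubFlen : subF.length = n := by
    rw [hsubF, pvApplyT_length, hsub0, List.length_replicate]
  have h1 : pvA_loop1 dct weights F [(0, -1)] sub0 = subF := by
    have hf : F = 2 * pvSizeT t0 + (F - 2 * pvSizeT t0) := by omega
    have hrun := pvRunT dct weights t0 (-1) hbt0 hlab0 (F - 2 * pvSizeT t0) [] sub0
    rw [hroot0] at hrun
    rw [hf, hrun, pvA_loop1_nil]
  set ans0 := subF.map (·.1) with hans0
  have hans0len : ans0.length = n := by rw [hans0, List.length_map, hsubFlen]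
  have hlab2 : ∀ u ∈ pvLabelsT t0, 0 ≤ u ∧ u.toNat < ans0.length := by
    intro u hu
    have := hrange' u hu
    exact ⟨this.1, by rw [hans0len]; omega⟩
  obtain ⟨hframe2, hq⟩ := pvApply2T_spec weights subF t0 0 ans0 hnd hlab2
  have h2 : pvA_loop2 dct weights subF F [(0, -1, 0)] ans0
      = pvApply2T weights subF t0 0 ans0 := by
    have hf : F = pvSizeT t0 + (F - pvSizeT t0) := by omega
    have hrun := pvRun2T dct weights subF t0 (-1) 0 hbt0 (F - pvSizeT t0) [] ans0
    rw [hroot0] at hrun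
    rw [hf, hrun, pvA_loop2_nil]
  have hups := pvUpsOp_eq weights subF t0 (-1) 0 hsubvals
  have hA : get_tree_distance_max_weighted dct weights = pvApply2T weights subF t0 0 ans0 := by
    rw [get_tree_distance_max_weighted]
    rw [← hn, ← hF, ← hsub0, h1, ← hans0, h2]
  have hAlen : (pvApply2T weights subF t0 0 ans0).length = n := by
    rw [pvApply2T_length, hans0len]
  -- ===== B side: the recovered edge array =====
  set nbr0 := List.replicate n ([] : List Int) with hnbr0
  have hdisc : pvB_disc dct F [(0, -1)] nbr0 = pvDiscT dct t0 (-1) nbr0 := by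
    have hf : F = pvSizeT t0 + (F - pvSizeT t0) := by omega
    have hrun := pvDiscRunT dct t0 (-1) hbt0 (F - pvSizeT t0) [] nbr0
    rw [hroot0] at hrun
    rw [hf, hrun, pvB_disc_nil]
  set nbrF := pvDiscT dct t0 (-1) nbr0 with hnbrF
  obtain ⟨hDlen, hDframe, hDroot, hDval⟩ := pvDiscT_spec dct t0 (-1) nbr0 hbt0 hnd
    (fun x hx => by
      have := hrange' x hx
      refine ⟨this.1, ?_⟩
      rw [hnbr0, List.length_replicate]
      omega)
    (fun x hx _ => by
      have := hrange' x hx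
      rw [hnbr0, List.getElem?_replicate, if_pos (by omega)])
  have hDlen' : nbrF.length = n := by
    rw [hnbrF, hDlen, hnbr0, List.length_replicate]
  -- the derived symmetric dictionary
  set dct2 := (List.range n).map (fun i : Nat => ((i : Int), (nbrF[i]?).getD [])) with hdct2
  have hget2 : ∀ k : Nat, k < n →
      (PySem.Dict.mk dct2).get? (k : Int) = some ((nbrF[k]?).getD []) :=
    fun k hk => pvGetRange (fun i => (nbrF[i]?).getD []) n k hk
  have hread : ∀ u adj, (PySem.Dict.mk dct2).get? u = some adj →
      (PySem.List.pyGet? nbrF u).getD [] = adj := by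
    intro u adj h
    obtain ⟨i, hi, hpe⟩ := List.mem_map.1 (pvGet?_mem_of_some h)
    have hu : ((i : Nat) : Int) = u := congrArg Prod.fst hpe
    have hv : (nbrF[i]?).getD [] = adj := congrArg Prod.snd hpe
    rw [← hu, PySem.List.pyGet?_natCast, hv]
  -- the per-label adjacency of the written array
  have hentry : ∀ p ∈ pvSubsT t0 (-1), ∀ w cs, p.1 = pvRTree.node w cs →
      nbrF[w.toNat]? = some (pvPad p.2 ++ pvRootsF cs)
      ∧ 0 ≤ w ∧ w.toNat < n
      ∧ (p.2 = -1 ∨ (0 ≤ p.2 ∧ p.2 ∉ pvLabelsT p.1)) := by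
    intro p hp w cs hpw
    have hwmem : w ∈ pvLabelsT t0 := by
      have := pvSubsT_root_mem t0 (-1) p hp
      rw [hpw] at this
      simpa using this
    have hw0 := hrange' w hwmem
    rcases pvSubs_parentT t0 (-1) p hp with rfl | ⟨qe, hqe, wq, csq, hqn, hp2, hp1⟩
    · -- head entry: p = (t0, -1)
      have hr := hDroot w cs hpw
      rw [← hnbrF] at hr
      refine ⟨?_, hw0.1, by omega, Or.inl rfl⟩
      rw [hr, hnbr0, List.getElem?_replicate, if_pos (by omega)]
      simp [pvPad]
    · -- a deeper entry with parent wq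
      have hwqmem : wq ∈ pvLabelsT t0 := by
        have := pvSubsT_root_mem t0 (-1) qe hqe
        rw [hqn] at this
        simpa using this
      have hwq0 := hrange' wq hwqmem
      have hqnd : (pvLabelsT qe.1).Nodup :=
        (pvSubs_labels_sublist_T t0 (-1) qe hqe).nodup hnd
      have hqnd2 : wq ∉ pvLabelsF csq := by
        rw [hqn] at hqnd
        exact (List.nodup_cons.1 (by simpa using hqnd)).1
      have hp1sub : (pvLabelsT p.1).Sublist (pvLabelsF csq) :=
        pvLabels_member_sublist csq p.1 hp1
      have hwne : w ≠ pvRoot t0 := by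
        intro h
        have hpeq : p = (t0, -1) :=
          pvSubs_unique t0 (-1) hnd p (t0, -1)
            hp (by cases t0 with | node a b => rw [pvSubsT]; exact List.mem_cons_self)
            (by rw [hpw]; simpa using h)
        have : p.2 = -1 := by rw [hpeq]
        rw [hp2] at this
        omega
      have hv := hDval p hp w cs hpw hwne
      rw [← hnbrF] at hv
      refine ⟨?_, hw0.1, by omega, Or.inr ⟨by omega, ?_⟩⟩
      · rw [hv, hp2]
        have : pvPad wq = [wq] := by rw [pvPad, if_neg (by omega)]
        rw [this]
        rfl
      · rw [hp2]
        intro hmem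
        exact hqnd2 (hp1sub.mem hmem)
  -- rootsF of an entry's children sit inside the entry's labels
  have hroots_in : ∀ (w : Int) (cs : pvForest), ∀ v ∈ pvRootsF cs,
      v ∈ pvLabelsT (pvRTree.node w cs) := by
    intro w cs v hv
    rw [pvLabelsT_node]
    exact List.mem_cons_of_mem _ ((pvRootsF_subperm cs).subset hv)
  have hlabels_entry : ∀ p ∈ pvSubsT t0 (-1), ∀ x ∈ pvLabelsT p.1, x ∈ pvLabelsT t0 := by
    intro p hp x hx
    exact (pvSubs_labels_sublist_T t0 (-1) p hp).mem hx
  -- the context hypothesis for rebuilding inside dct2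
  have H2 : ∀ p ∈ pvSubsT t0 (-1), ∀ u ts, p.1 = pvRTree.node u ts →
      (PySem.Dict.mk dct2).get? u = some (pvPad p.2 ++ pvRootsF ts)
      ∧ (pvPad p.2 ++ pvRootsF ts).filter (· ≠ p.2) = pvRootsF ts := by
    intro p hp u ts hpw
    obtain ⟨hval, hu0, hulen, hside⟩ := hentry p hp u ts hpw
    have hu' : ((u.toNat : Nat) : Int) = u := Int.toNat_of_nonneg hu0
    have hg2 : (PySem.Dict.mk dct2).get? u = some (pvPad p.2 ++ pvRootsF ts) := by
      have := hget2 u.toNat hulen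
      rw [hu', hval] at this
      simpa using this
    refine ⟨hg2, ?_⟩
    have hrpos : ∀ v ∈ pvRootsF ts, 0 ≤ v := by
      intro v hv
      have : v ∈ pvLabelsT t0 := hlabels_entry p hp v (by
        rw [hpw]
        exact hroots_in u ts v hv)
      exact (hrange' v this).1
    rcases hside with h | ⟨hpos, hnotin⟩
    · rw [h, pvPad, if_pos rfl, List.nil_append]
      exact pvFilter_ne_of_forall (fun v hv hveq => by
        have := hrpos v hv
        omega)
    · rw [pvPad, if_neg (by omega), List.cons_append, List.filter_cons,
        if_neg (by simp), List.nil_append]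
      exact pvFilter_ne_of_forall (fun v hv hveq => by
        apply hnotin
        rw [hpw]
        exact hveq ▸ hroots_in u ts v hv)
  have hb2 : pvBuiltT dct2 (pvRoot t0) (-1) t0 :=
    pvBuilt2_aux dct2 (pvSizeT t0) t0 (-1) (le_refl _) H2
  -- the rerooting context over dct2
  have hctx0 : pvCtx dct2 weights (pvSizeT t0) t0 (-1) 0 := by
    refine ⟨hb2, hnd, hlab0, ?_, ?_, Or.inl ⟨rfl, rfl, rfl⟩⟩
    · intro hmem
      have := hlab0 _ hmem
      omega
    · intro e he
      cases hec : e.1 with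
      | node w cs =>
        obtain ⟨hg2, hfilt2⟩ := H2 e he w cs hec
        have hadj2 : pvAdj dct2 w = pvPad e.2 ++ pvRootsF cs := by
          rw [pvAdj, hg2]
          rfl
        obtain ⟨hval, hu0, hulen, hside⟩ := hentry e he w cs hec
        simp only [pvRoot_node]
        constructor
        · intro v hv
          rw [hadj2] at hv
          rcases List.mem_append.1 hv with hv | hv
          · rcases hside with h | ⟨hpos, _⟩
            · rw [h, pvPad, if_pos rfl] at hv
              simp at hv
            · rw [pvPad, if_neg (by omega)] at hv
              rcases List.mem_singleton.1 hv with rfl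
              exact hpos
          · have : v ∈ pvLabelsT t0 := hlabels_entry e he v (by
              rw [hec]
              exact hroots_in w cs v hv)
            exact (hrange' v this).1
        · intro hne
          rw [hadj2]

          rcases hside with h | ⟨hpos, hnotin⟩
          · exact absurd h hne
          · rw [pvPad, if_neg (by omega), List.count_append, List.count_cons]
            have : (pvRootsF cs).count e.2 = 0 := by
              apply List.count_eq_zero.2
              intro hmem
              apply hnotin
              rw [hec]
              exact hroots_in w cs e.2 hmem
            simp [this]
  -- ===== the per-index equality =====
  rw [hA, get_tree_distance_max_weighted_alt]
  rw [← hn, ← hF, ← hnbr0, hdisc]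
  apply List.ext_getElem
  · rw [hAlen, List.length_map, List.length_range]
  intro k hk1 hk2
  have hkn : k < n := by rwa [hAlen] at hk1
  rw [List.getElem_map, List.getElem_range]
  by_cases hkls : (k : Int) ∈ pvLabelsT t0
  · -- k is a tree node
    have hmm : (k : Int) ∈ (pvSubsU weights t0 (-1) 0).map (fun e => pvRoot e.1) := by
      rw [pvSubsU_roots]; exact hkls
    obtain ⟨e, he, hre⟩ := List.mem_map.1 hmm
    have hqmem : ((k : Int), e.2.2) ∈ pvUpsOp weights subF t0 0 := by
      rw [hups]
      have h6 : (pvRoot e.1, e.2.2)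
          ∈ (pvSubsU weights t0 (-1) 0).map (fun e => (pvRoot e.1, e.2.2)) :=
        List.mem_map_of_mem he
      rwa [hre] at h6
    have hqval := hq ((k : Int), e.2.2) hqmem
    have hesub : (e.1, e.2.1) ∈ pvSubsT t0 (-1) := by
      rw [← pvSubsU_proj weights t0 (-1) 0]
      exact List.mem_map_of_mem he
    have hsubk := hsubvals (e.1, e.2.1) hesub
    rw [hre] at hsubk
    have hknat : ((k : Int)).toNat = k := by omega
    have hsubk' : subF[k]? = some (pvDV weights e.1) := by
      rw [PySem.List.pyGet?_of_nonneg _ (by omega : (0:Int) ≤ (k:Int)), hknat] at hsubk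
      exact hsubk
    have hans0k : PySem.List.pyGet? ans0 (k : Int) = some (pvDV weights e.1).1 := by
      rw [PySem.List.pyGet?_of_nonneg _ (by omega : (0:Int) ≤ (k:Int)), hknat, hans0]
      rw [List.getElem?_map, hsubk']
      rfl
    have hAk : (pvApply2T weights subF t0 0 ans0)[k]?
        = some (if (pvDV weights e.1).1 > e.2.2 then (pvDV weights e.1).1 else e.2.2) := by
      have := hqval
      simp only [hans0k] at this
      rw [PySem.List.pyGet?_of_nonneg _ (by omega : (0:Int) ≤ (k:Int)), hknat] at this
      simpa using this
    obtain ⟨T, hTb, hTsz, hTdn⟩ := pvC2 dct2 weights (pvSizeT t0) t0 (-1) 0 hctx0 e he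
    have hTroot : pvRoot T = (k : Int) := by
      rw [pvBuiltT_root dct2 (pvRoot e.1) (-1) T hTb, hre]
    have hB : pvB_far nbrF weights F [((k : Int), -1, 0)] 0
        = max (pvDn weights e.1) e.2.2 := by
      have hf : F = pvSizeT T + (F - pvSizeT T) := by omega
      have hTb' : pvBuiltT dct2 (pvRoot T) (-1) T := by rw [hTroot, ← hre]; exact hTb
      have hrun := pvRun3T dct2 nbrF weights hread T (-1) 0 hTb' (F - pvSizeT T) [] 0
      rw [hTroot] at hrun
      rw [hf, hrun, pvB_far_nil, pvFar2T_val]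
      rw [zero_add]
      have := pvDn_nonneg weights T
      rw [← hTdn]
      omega
    have hgetA : (pvApply2T weights subF t0 0 ans0)[k] =
        (if (pvDV weights e.1).1 > e.2.2 then (pvDV weights e.1).1 else e.2.2) := by
      have h5 : some ((pvApply2T weights subF t0 0 ans0)[k])
          = some (if (pvDV weights e.1).1 > e.2.2 then (pvDV weights e.1).1 else e.2.2) := by
        rw [← List.getElem?_eq_getElem hk1, hAk]
      exact Option.some.inj h5
    rw [hgetA, hB]
    simp only [pvDn]
    split_ifs <;> omega
  · -- k is not a tree node: both sides are 0
    have hknat : ((k : Int)).toNat = k := by omega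
    have hAk : (pvApply2T weights subF t0 0 ans0)[k]? = some 0 := by
      rw [hframe2 k hkls, hans0, List.getElem?_map, hframe1 k hkls, hsub0,
        List.getElem?_replicate, if_pos hkn]
      rfl
    have hgetA : (pvApply2T weights subF t0 0 ans0)[k] = 0 := by
      have h5 : some ((pvApply2T weights subF t0 0 ans0)[k]) = some (0 : Int) := by
        rw [← List.getElem?_eq_getElem hk1, hAk]
      exact Option.some.inj h5
    have hnbrk : nbrF[k]? = some [] := by
      rw [hnbrF, hDframe k hkls, hnbr0, List.getElem?_replicate, if_pos hkn]
    have hB : pvB_far nbrF weights F [((k : Int), -1, 0)] 0 = 0 := by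
      obtain ⟨f, hFf⟩ : ∃ f, F = f + 1 := ⟨F - 1, by omega⟩
      rw [hFf, pvB_far]
      have hadj : (PySem.List.pyGet? nbrF (k : Int)).getD [] = [] := by
        rw [PySem.List.pyGet?_natCast, hnbrk]
        rfl
      simp only [hadj]
      rw [show (if (0 : Int) > 0 then (0 : Int) else 0) = 0 from rfl]
      rw [List.foldl_nil, pvB_far_nil]
    rw [hgetA, hB]

-- ===== VERDICT (by name: the statement is the Claim_ definition above) =====
theorem get_tree_distance_max_weighted_spec : Claim_equal_get_tree_distance_max_weighted := by
  intro dct weights _ hpre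
  exact pvFinal dct weights hpre
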